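-- pv_equiv track=rewrite | github.com/Tanmay337442/percolationmagnet | bfspercolationsimplecubic.py | largestchunk
-- ===== SOURCE A (Python) =====
-- from collections import deque
--
-- directions = [(1, 0, 0), (-1, 0, 0), (0, 1, 0), (0, -1, 0), (0, 0, 1), (0, 0, -1)]
--
-- def bfs(array, start, visited, size):
--     n = 0
--     queue = deque([start])
--     while queue:
--         x, y, z = queue.popleft()
--         n += 1
--         for dx, dy, dz in directions:
--             nx, ny, nz = x + dx, y + dy, z + dz
--
--             if nx < 0:
--                 nx = size - 1
--             elif nx >= size:
--                 nx = 0
--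
--             if ny < 0:
--                 ny = size - 1
--             elif ny >= size:
--                 ny = 0
--
--             if nz < 0:
--                 nz = size - 1
--             elif nz >= size:
--                 nz = 0
--
--             if not visited[nx][ny][nz] and not array[nx][ny][nz]:
--                 visited[nx][ny][nz] = True
--                 queue.append((nx, ny, nz))
--
--     return n
--
-- def largestchunk(array, size):
--     visited = [[[False] * size for _ in range(size)] for _ in range(size)]
--     max = 0
--
--     for x in range(size):
--         for y in range(size):
--             for z in range(size):
--                 if not visited[x][y][z] and not array[x][y][z]:
--                     visited[x][y][z] = True
--                     n = bfs(array, (x, y, z), visited, size)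
--                     if n > max:
--                         max = n
--
--     return max
-- ===== SOURCE B (Python) =====
-- def largestchunk(array, size):
--     # Incremental component merging: scan each empty cell once and merge the
--     # already-built blobs that touch it (no BFS/DFS search, no visited grid).
--     comps = []
--     for x in range(size):
--         for y in range(size):
--             for z in range(size):
--                 if not array[x][y][z]:
--                     nbrs = {((x + dx) % size, (y + dy) % size, (z + dz) % size)
--                             for dx, dy, dz in
--                             ((1, 0, 0), (-1, 0, 0), (0, 1, 0),
--                              (0, -1, 0), (0, 0, 1), (0, 0, -1))}
--                     touching = [K for K in comps if K & nbrs]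
--                     rest = [K for K in comps if not (K & nbrs)]
--                     merged = {(x, y, z)}
--                     for K in touching:
--                         merged |= K
--                     comps = rest + [merged]
--     best = 0
--     for K in comps:
--         if len(K) > best:
--             best = len(K)
--     return best
-- ===== Notes on version B (the rewrite author's own statement) =====
-- stated objective: alternative
-- what changed: Replaces the seeded BFS flood fill (visited grid + deque, one search per unvisited empty cell) by a single scan over all cells that incrementally merges the already-built component blobs touching each new empty cell's six periodic neighbours (partition merging, no search queue/stack and no visited structure), returning the largest final blob.
import Mathlib
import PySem

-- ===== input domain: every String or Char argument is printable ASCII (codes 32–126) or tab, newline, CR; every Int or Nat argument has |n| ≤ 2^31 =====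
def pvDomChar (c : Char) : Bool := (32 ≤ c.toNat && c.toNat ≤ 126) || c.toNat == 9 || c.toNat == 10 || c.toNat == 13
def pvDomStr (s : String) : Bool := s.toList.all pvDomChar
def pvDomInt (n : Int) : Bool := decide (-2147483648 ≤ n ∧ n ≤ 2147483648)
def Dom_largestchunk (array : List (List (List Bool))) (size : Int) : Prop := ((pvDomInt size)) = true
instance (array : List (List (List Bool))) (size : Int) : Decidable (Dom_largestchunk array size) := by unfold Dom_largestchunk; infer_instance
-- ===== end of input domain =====

-- B (largestchunk_alt) replaces A's seeded BFS flood fill (visited grid, deque, per-seed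
-- search) by a single scan that merges already-built component blobs touching each new
-- empty cell (incremental partition merging); objective: alternative (no speed claim).

-- ===== PORT A =====

-- shared reader for `array[x][y][z]` / `visited[x][y][z]`: inside Pre_ every executed read
-- has 0 ≤ index < size ≤ length, where it returns exactly the Python value; an out-of-range
-- read (IndexError in Python, excluded by Pre_) is rendered as `true` to keep the port total.
def pvGet3 (g : List (List (List Bool))) (x y z : Int) : Bool :=
  if 0 ≤ x ∧ 0 ≤ y ∧ 0 ≤ z then
    ((g[x.toNat]?.bind fun p => p[y.toNat]?.bind fun r => r[z.toNat]?).getD true)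
  else true

-- `visited[x][y][z] = True` (indices produced by the wrap code are in [0, size) whenever the
-- loop runs; the guard only keeps the port total)
def pvSet3 (g : List (List (List Bool))) (x y z : Int) : List (List (List Bool)) :=
  if 0 ≤ x ∧ 0 ≤ y ∧ 0 ≤ z then
    let p := g.getD x.toNat []
    let r := p.getD y.toNat []
    g.set x.toNat (p.set y.toNat (r.set z.toNat true))
  else g

-- number of cells / number of True cells of a 3-level list (termination measure only)
def pvShape (g : List (List (List Bool))) : Nat :=
  (g.map fun p => (p.map List.length).sum).sum
def pvTrue (g : List (List (List Bool))) : Nat :=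
  (g.map fun p => (p.map (List.countP id)).sum).sum

-- directions = [(1,0,0),(-1,0,0),(0,1,0),(0,-1,0),(0,0,1),(0,0,-1)]
def pvDirs : List (Int × Int × Int) :=
  [(1,0,0), (-1,0,0), (0,1,0), (0,-1,0), (0,0,1), (0,0,-1)]

-- the if/elif wrap of A
def pvClamp (size i : Int) : Int := if i < 0 then size - 1 else if i ≥ size then 0 else i

-- body of A's `for dx, dy, dz in directions` loop (state: visited grid × queue)
def pvBfsStep (array : List (List (List Bool))) (size : Int) (c : Int × Int × Int)
    (st : List (List (List Bool)) × List (Int × Int × Int)) (d : Int × Int × Int) :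
    List (List (List Bool)) × List (Int × Int × Int) :=
  let nx := pvClamp size (c.1 + d.1)
  let ny := pvClamp size (c.2.1 + d.2.1)
  let nz := pvClamp size (c.2.2 + d.2.2)
  if pvGet3 st.1 nx ny nz = false ∧ pvGet3 array nx ny nz = false then
    (pvSet3 st.1 nx ny nz, st.2 ++ [(nx, ny, nz)])
  else st

lemma pvSumSet (L : List Nat) (n : Nat) (a : Nat) (h : n < L.length) :
    (L.set n a).sum + L[n] = L.sum + a := by
  rw [List.sum_set, if_pos h]
  have h2 := List.sum_take_add_sum_drop L n
  rw [List.drop_eq_getElem_cons h] at h2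
  simp only [List.sum_cons] at h2
  omega

lemma pvTrue_le_pvShape (g : List (List (List Bool))) : pvTrue g ≤ pvShape g := by
  unfold pvTrue pvShape
  apply List.sum_le_sum
  intro p _
  apply List.sum_le_sum
  intro r _
  exact List.countP_le_length

lemma pvGet3_false_elim (g : List (List (List Bool))) (x y z : Int)
    (h : pvGet3 g x y z = false) :
    ∃ p r, 0 ≤ x ∧ 0 ≤ y ∧ 0 ≤ z ∧ g[x.toNat]? = some p ∧ p[y.toNat]? = some r ∧
      r[z.toNat]? = some false := by
  unfold pvGet3 at h
  split at h
  case isFalse => simp at h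
  case isTrue hpos =>
    obtain ⟨hx, hy, hz⟩ := hpos
    cases hgx : g[x.toNat]? with
    | none => rw [hgx] at h; simp at h
    | some p =>
      rw [hgx] at h
      simp only [Option.bind_some] at h
      cases hgy : p[y.toNat]? with
      | none => rw [hgy] at h; simp at h
      | some r =>
        rw [hgy] at h
        simp only [Option.bind_some] at h
        cases hgz : r[z.toNat]? with
        | none => rw [hgz] at h; simp at h
        | some b =>
          rw [hgz] at h
          simp only [Option.getD_some] at h
          refine ⟨p, r, hx, hy, hz, rfl, hgy, ?_⟩
          rw [hgz, h]

lemma pvSet3_eq (g : List (List (List Bool))) (x y z : Int)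
    (h : pvGet3 g x y z = false) :
    ∀ p r, g[x.toNat]? = some p → p[y.toNat]? = some r →
    pvSet3 g x y z = g.set x.toNat (p.set y.toNat (r.set z.toNat true)) := by
  intro p r hgx hgy
  obtain ⟨p', r', hx, hy, hz, hgx', hgy', hgz'⟩ := pvGet3_false_elim g x y z h
  have hp : g.getD x.toNat [] = p := by rw [List.getD_eq_getElem?_getD, hgx]; rfl
  have hr : p.getD y.toNat [] = r := by rw [List.getD_eq_getElem?_getD, hgy]; rfl
  unfold pvSet3
  rw [if_pos ⟨hx, hy, hz⟩]
  simp only [hp, hr]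

lemma pvSet3_pvShape (g : List (List (List Bool))) (x y z : Int)
    (h : pvGet3 g x y z = false) : pvShape (pvSet3 g x y z) = pvShape g := by
  obtain ⟨p, r, hx, hy, hz, hgx, hgy, hgz⟩ := pvGet3_false_elim g x y z h
  obtain ⟨hlx, hvx⟩ := List.getElem?_eq_some_iff.mp hgx
  obtain ⟨hly, hvy⟩ := List.getElem?_eq_some_iff.mp hgy
  obtain ⟨hlz, hvz⟩ := List.getElem?_eq_some_iff.mp hgz
  rw [pvSet3_eq g x y z h p r hgx hgy]
  unfold pvShape
  rw [List.map_set]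
  have hnp : ((p.set y.toNat (r.set z.toNat true)).map List.length).sum
      = (p.map List.length).sum := by
    rw [List.map_set, List.length_set]
    have h1 : (p.map List.length)[y.toNat]'(by rw [List.length_map]; exact hly) = r.length := by
      rw [List.getElem_map, hvy]
    have h2 := pvSumSet (p.map List.length) y.toNat r.length
      (by rw [List.length_map]; exact hly)
    omega
  rw [hnp]
  have h3 : (g.map fun q => (q.map List.length).sum)[x.toNat]'
      (by rw [List.length_map]; exact hlx) = (p.map List.length).sum := by
    rw [List.getElem_map, hvx]
  have h4 := pvSumSet (g.map fun q => (q.map List.length).sum) x.toNat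
    (p.map List.length).sum (by rw [List.length_map]; exact hlx)
  omega

lemma pvSet3_pvTrue (g : List (List (List Bool))) (x y z : Int)
    (h : pvGet3 g x y z = false) : pvTrue (pvSet3 g x y z) = pvTrue g + 1 := by
  obtain ⟨p, r, hx, hy, hz, hgx, hgy, hgz⟩ := pvGet3_false_elim g x y z h
  obtain ⟨hlx, hvx⟩ := List.getElem?_eq_some_iff.mp hgx
  obtain ⟨hly, hvy⟩ := List.getElem?_eq_some_iff.mp hgy
  obtain ⟨hlz, hvz⟩ := List.getElem?_eq_some_iff.mp hgz
  rw [pvSet3_eq g x y z h p r hgx hgy]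
  unfold pvTrue
  rw [List.map_set]
  have hcnt : List.countP id (r.set z.toNat true) = List.countP id r + 1 := by
    rw [List.countP_set hlz]
    simp [hvz]
  have hnp : ((p.set y.toNat (r.set z.toNat true)).map (List.countP id)).sum
      = (p.map (List.countP id)).sum + 1 := by
    rw [List.map_set, hcnt]
    have h1 : (p.map (List.countP id))[y.toNat]'(by rw [List.length_map]; exact hly)
        = List.countP id r := by rw [List.getElem_map, hvy]
    have h2 := pvSumSet (p.map (List.countP id)) y.toNat (List.countP id r + 1)
      (by rw [List.length_map]; exact hly)
    omega
  rw [hnp]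
  have h3 : (g.map fun q => (q.map (List.countP id)).sum)[x.toNat]'
      (by rw [List.length_map]; exact hlx) = (p.map (List.countP id)).sum := by
    rw [List.getElem_map, hvx]
  have h4 := pvSumSet (g.map fun q => (q.map (List.countP id)).sum) x.toNat
    ((p.map (List.countP id)).sum + 1) (by rw [List.length_map]; exact hlx)
  omega

lemma pvBfsFold_term (array : List (List (List Bool))) (size : Int) (c : Int × Int × Int)
    (ds : List (Int × Int × Int)) :
    ∀ st, pvShape (ds.foldl (pvBfsStep array size c) st).1 = pvShape st.1 ∧
      ∃ k, pvTrue (ds.foldl (pvBfsStep array size c) st).1 = pvTrue st.1 + k ∧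
        (ds.foldl (pvBfsStep array size c) st).2.length = st.2.length + k := by
  induction ds with
  | nil => intro st; exact ⟨rfl, 0, rfl, rfl⟩
  | cons d ds ih =>
    intro st
    simp only [List.foldl_cons]
    obtain ⟨hs, k, ht, hl⟩ := ih (pvBfsStep array size c st d)
    by_cases hc : pvGet3 st.1 (pvClamp size (c.1 + d.1)) (pvClamp size (c.2.1 + d.2.1))
        (pvClamp size (c.2.2 + d.2.2)) = false ∧
        pvGet3 array (pvClamp size (c.1 + d.1)) (pvClamp size (c.2.1 + d.2.1))
        (pvClamp size (c.2.2 + d.2.2)) = false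
    · have hstep : pvBfsStep array size c st d =
          (pvSet3 st.1 (pvClamp size (c.1 + d.1)) (pvClamp size (c.2.1 + d.2.1))
            (pvClamp size (c.2.2 + d.2.2)),
           st.2 ++ [(pvClamp size (c.1 + d.1), pvClamp size (c.2.1 + d.2.1),
            pvClamp size (c.2.2 + d.2.2))]) := by
        simp only [pvBfsStep]
        rw [if_pos hc]
      rw [hstep] at hs ht hl ⊢
      refine ⟨?_, k + 1, ?_, ?_⟩
      · rw [hs]; exact pvSet3_pvShape _ _ _ _ hc.1
      · rw [ht, pvSet3_pvTrue _ _ _ _ hc.1]; omega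
      · rw [hl]; simp; omega
    · have hstep : pvBfsStep array size c st d = st := by
        simp only [pvBfsStep]
        rw [if_neg hc]
      rw [hstep] at hs ht hl ⊢
      exact ⟨hs, k, ht, hl⟩

-- A's `bfs` (returns the mutated `visited` together with n)
def pvBfs (array : List (List (List Bool))) (size : Int) (visited : List (List (List Bool)))
    (queue : List (Int × Int × Int)) (n : Int) : List (List (List Bool)) × Int :=
  match queue with
  | [] => (visited, n)
  | c :: rest =>
    let st := pvDirs.foldl (pvBfsStep array size c) (visited, rest)
    pvBfs array size st.1 st.2 (n + 1)
termination_by (pvShape visited - pvTrue visited, queue.length)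
decreasing_by
  obtain ⟨hs, k, ht, hl⟩ := pvBfsFold_term array size c pvDirs (visited, rest)
  have hb := pvTrue_le_pvShape (pvDirs.foldl (pvBfsStep array size c) (visited, rest)).1
  dsimp only at hs ht hl hb ⊢
  simp only [List.length_cons] at *
  rcases Nat.eq_zero_or_pos k with h0 | hp
  · apply Prod.Lex.right' <;> omega
  · apply Prod.Lex.left; omega

def largestchunk (array : List (List (List Bool))) (size : Int) : Int :=
  let visited := List.replicate size.toNat
      (List.replicate size.toNat (List.replicate size.toNat false))
  let st := (PySem.List.pyRange 0 size 1).foldl (fun st x =>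
    (PySem.List.pyRange 0 size 1).foldl (fun st y =>
      (PySem.List.pyRange 0 size 1).foldl (fun st z =>
        if pvGet3 st.1 x y z = false ∧ pvGet3 array x y z = false then
          let v := pvSet3 st.1 x y z
          let r := pvBfs array size v [(x, y, z)] 0
          (r.1, if r.2 > st.2 then r.2 else st.2)
        else st) st) st) (visited, (0 : Int))
  st.2

-- ===== PORT B =====

-- ((x+dx) % size, (y+dy) % size, (z+dz) % size)
def pvNbr (size : Int) (c d : Int × Int × Int) : Int × Int × Int :=
  (PySem.Int.mod (c.1 + d.1) size, PySem.Int.mod (c.2.1 + d.2.1) size,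
   PySem.Int.mod (c.2.2 + d.2.2) size)

-- body of B's innermost loop: on an empty cell, merge the blobs touching its neighbourhood
def pvMergeStep (array : List (List (List Bool))) (size : Int)
    (comps : List (List (Int × Int × Int))) (c : Int × Int × Int) :
    List (List (Int × Int × Int)) :=
  if pvGet3 array c.1 c.2.1 c.2.2 = false then
    let nbrs := pvDirs.map (pvNbr size c)
    let touching := comps.filter fun K => K.any fun q => nbrs.contains q
    let rest := comps.filter fun K => !(K.any fun q => nbrs.contains q)
    rest ++ [c :: touching.flatten]
  else comps

def largestchunk_alt (array : List (List (List Bool))) (size : Int) : Int :=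
  let comps := (PySem.List.pyRange 0 size 1).foldl (fun comps x =>
    (PySem.List.pyRange 0 size 1).foldl (fun comps y =>
      (PySem.List.pyRange 0 size 1).foldl (fun comps z =>
        pvMergeStep array size comps (x, y, z)) comps) comps) []
  comps.foldl (fun best K => if (K.length : Int) > best then (K.length : Int) else best) 0

-- ===== PRECONDITION & SPEC =====

-- Pre_ excludes exactly the inputs on which A raises IndexError: when 0 < size, every cell
-- (x,y,z) ∈ [0,size)³ of `array` is eventually read, so the first size entries of each level
-- must themselves have length ≥ size; for size ≤ 0 A touches nothing and returns 0.
def Pre_largestchunk (array : List (List (List Bool))) (size : Int) : Prop :=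
  0 < size →
    (size ≤ (array.length : Int) ∧
      ∀ p ∈ array.take size.toNat, size ≤ (p.length : Int) ∧
        ∀ r ∈ p.take size.toNat, size ≤ (r.length : Int))

instance (array : List (List (List Bool))) (size : Int) : Decidable (Pre_largestchunk array size) := by
  unfold Pre_largestchunk; infer_instance

def pvWitness_largestchunk : List (List (List Bool)) × Int := ([[[false]]], 1)

def Spec_largestchunk (array : List (List (List Bool))) (size : Int) (out : Int) : Prop :=
  out = largestchunk_alt array size
instance (array : List (List (List Bool))) (size : Int) (out : Int) :
    Decidable (Spec_largestchunk array size out) := by unfold Spec_largestchunk; infer_instance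

-- ===== CLAIM (what is proved, stated in full; the proofs are below) =====
def Claim_equal_largestchunk : Prop := ∀ (array : List (List (List Bool))) (size : Int),
  Dom_largestchunk array size → Pre_largestchunk array size →
    Spec_largestchunk array size (largestchunk array size)

-- ===== LEMMAS AND PROOFS =====

-- ---- Phase 1: A equals an internal seen-set model (pvModel) ----

lemma pvGet3_false_shape (g : List (List (List Bool))) (x y z : Int)
    (h : pvGet3 g x y z = false) :
    0 ≤ x ∧ 0 ≤ y ∧ 0 ≤ z ∧ x.toNat < g.length ∧
      y.toNat < (g.getD x.toNat []).length ∧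
      z.toNat < ((g.getD x.toNat []).getD y.toNat []).length := by
  obtain ⟨p, r, hx, hy, hz, hgx, hgy, hgz⟩ := pvGet3_false_elim g x y z h
  have hp : g.getD x.toNat [] = p := by rw [List.getD_eq_getElem?_getD, hgx]; rfl
  have hr : p.getD y.toNat [] = r := by rw [List.getD_eq_getElem?_getD, hgy]; rfl
  obtain ⟨hlx, -⟩ := List.getElem?_eq_some_iff.mp hgx
  obtain ⟨hly, -⟩ := List.getElem?_eq_some_iff.mp hgy
  obtain ⟨hlz, -⟩ := List.getElem?_eq_some_iff.mp hgz
  exact ⟨hx, hy, hz, hlx, by rw [hp]; exact hly, by rw [hp, hr]; exact hlz⟩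

-- body of the model's `for dx, dy, dz` loop (state: seen set × stack)
def pvDfsStep (array : List (List (List Bool))) (size : Int) (c : Int × Int × Int)
    (st : PySem.Set (Int × Int × Int) × List (Int × Int × Int)) (d : Int × Int × Int) :
    PySem.Set (Int × Int × Int) × List (Int × Int × Int) :=
  let p := pvNbr size c d
  if PySem.Set.contains st.1 p = false ∧ pvGet3 array p.1 p.2.1 p.2.2 = false then
    (PySem.Set.add st.1 p, st.2 ++ [p])
  else st

-- all valid index triples of g, and `g` is in-shape at p (termination measure only)
def pvCells (g : List (List (List Bool))) : List (Int × Int × Int) :=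
  (List.range g.length).flatMap fun x =>
    (List.range (g.getD x []).length).flatMap fun y =>
      (List.range ((g.getD x []).getD y []).length).map fun (z : Nat) =>
        ((x : Int), (y : Int), (z : Int))
abbrev pvInShape (g : List (List (List Bool))) (p : Int × Int × Int) : Prop :=
  0 ≤ p.1 ∧ 0 ≤ p.2.1 ∧ 0 ≤ p.2.2 ∧ p.1.toNat < g.length ∧
    p.2.1.toNat < (g.getD p.1.toNat []).length ∧
    p.2.2.toNat < ((g.getD p.1.toNat []).getD p.2.1.toNat []).length

def pvSeenCnt (g : List (List (List Bool))) (seen : List (Int × Int × Int)) : Nat :=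
  ((PySem.Set.ofList seen).filter fun p => decide (pvInShape g p)).length

lemma pvSumMapRangeGetD {α : Type} (l : List α) (f : α → Nat) (d : α) :
    ((List.range l.length).map fun i => f (l.getD i d)).sum = (l.map f).sum := by
  induction l with
  | nil => simp
  | cons x t ih =>
    simp only [List.length_cons, List.range_succ_eq_map, List.map_cons, List.map_map,
      List.sum_cons, List.map_cons, List.getD_cons_zero]
    rw [← ih]
    congr 1

lemma pvCells_length (g : List (List (List Bool))) : (pvCells g).length = pvShape g := by
  unfold pvCells pvShape
  rw [List.length_flatMap]
  have h1 : ∀ x ∈ List.range g.length,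
      ((List.range (g.getD x []).length).flatMap fun y =>
        (List.range ((g.getD x []).getD y []).length).map fun (z : Nat) =>
          ((x : Int), (y : Int), (z : Int))).length
      = ((g.getD x []).map List.length).sum := by
    intro x _
    rw [List.length_flatMap]
    have h2 : ∀ y ∈ List.range (g.getD x []).length,
        ((List.range ((g.getD x []).getD y []).length).map fun (z : Nat) =>
          ((x : Int), (y : Int), (z : Int))).length = ((g.getD x []).getD y []).length := by
      intro y _; simp
    rw [List.map_congr_left h2]
    exact pvSumMapRangeGetD (g.getD x []) List.length []
  rw [List.map_congr_left h1]
  exact pvSumMapRangeGetD g (fun p => (p.map List.length).sum) []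

lemma pvMem_pvCells (g : List (List (List Bool))) (p : Int × Int × Int) :
    p ∈ pvCells g ↔ pvInShape g p := by
  obtain ⟨a, b, c⟩ := p
  unfold pvCells pvInShape
  constructor
  · intro hp
    rw [List.mem_flatMap] at hp
    obtain ⟨x, hx, hp⟩ := hp
    rw [List.mem_range] at hx
    rw [List.mem_flatMap] at hp
    obtain ⟨y, hy, hp⟩ := hp
    rw [List.mem_range] at hy
    rw [List.mem_map] at hp
    obtain ⟨z, hz, hpe⟩ := hp
    rw [List.mem_range] at hz
    obtain ⟨rfl, rfl, rfl⟩ : (x : Int) = a ∧ (y : Int) = b ∧ (z : Int) = c := by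
      rw [Prod.mk.injEq, Prod.mk.injEq] at hpe
      exact ⟨hpe.1, hpe.2.1, hpe.2.2⟩
    simp only [Int.toNat_natCast]
    exact ⟨Int.natCast_nonneg x, Int.natCast_nonneg y, Int.natCast_nonneg z, hx, hy, hz⟩
  · rintro ⟨h1, h2, h3, h4, h5, h6⟩
    rw [List.mem_flatMap]
    refine ⟨a.toNat, List.mem_range.mpr h4, ?_⟩
    rw [List.mem_flatMap]
    refine ⟨b.toNat, List.mem_range.mpr h5, ?_⟩
    rw [List.mem_map]
    refine ⟨c.toNat, List.mem_range.mpr h6, ?_⟩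
    rw [Int.toNat_of_nonneg h1, Int.toNat_of_nonneg h2, Int.toNat_of_nonneg h3]

lemma pvInShape_of_get3_false (g : List (List (List Bool))) (p : Int × Int × Int)
    (h : pvGet3 g p.1 p.2.1 p.2.2 = false) : pvInShape g p := by
  obtain ⟨h1, h2, h3, h4, h5, h6⟩ := pvGet3_false_shape g p.1 p.2.1 p.2.2 h
  exact ⟨h1, h2, h3, h4, h5, h6⟩

lemma pvSeenCnt_le_pvShape (g : List (List (List Bool))) (seen : List (Int × Int × Int)) :
    pvSeenCnt g seen ≤ pvShape g := by
  unfold pvSeenCnt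
  have hnd : ((PySem.Set.ofList seen).filter fun p => decide (pvInShape g p)).Nodup :=
    (PySem.Set.nodup_ofList seen).filter _
  have hsub : ((PySem.Set.ofList seen).filter fun p => decide (pvInShape g p)) ⊆ pvCells g := by
    intro p hp
    rw [List.mem_filter] at hp
    exact (pvMem_pvCells g p).mpr (of_decide_eq_true hp.2)
  exact le_trans (List.subperm_of_subset hnd hsub).length_le (le_of_eq (pvCells_length g))

lemma pvSeenCnt_add (g : List (List (List Bool))) (seen : List (Int × Int × Int))
    (p : Int × Int × Int) (hmem : p ∉ seen) (hsh : pvInShape g p) :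
    pvSeenCnt g (PySem.Set.add seen p) = pvSeenCnt g seen + 1 := by
  unfold pvSeenCnt
  have hpd : decide (pvInShape g p) = true := decide_eq_true hsh
  rw [PySem.Set.add_of_not_mem hmem, PySem.Set.ofList_append_singleton,
    PySem.Set.add_of_not_mem (by rw [PySem.Set.mem_ofList]; exact hmem),
    List.filter_append, List.length_append, List.filter_singleton, hpd]
  rfl

lemma pvDfsFold_term (array : List (List (List Bool))) (size : Int) (c : Int × Int × Int)
    (ds : List (Int × Int × Int)) :
    ∀ st, ∃ k, pvSeenCnt array (ds.foldl (pvDfsStep array size c) st).1 = pvSeenCnt array st.1 + k ∧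
        (ds.foldl (pvDfsStep array size c) st).2.length = st.2.length + k := by
  induction ds with
  | nil => intro st; exact ⟨0, rfl, rfl⟩
  | cons d ds ih =>
    intro st
    simp only [List.foldl_cons]
    obtain ⟨k, ht, hl⟩ := ih (pvDfsStep array size c st d)
    by_cases hc : PySem.Set.contains st.1 (pvNbr size c d) = false ∧
        pvGet3 array (pvNbr size c d).1 (pvNbr size c d).2.1 (pvNbr size c d).2.2 = false
    · have hnm : pvNbr size c d ∉ st.1 := by
        intro hm
        rw [(PySem.Set.contains_iff _ _).mpr hm] at hc
        exact absurd hc.1 (by simp)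
      have hstep : pvDfsStep array size c st d =
          (PySem.Set.add st.1 (pvNbr size c d), st.2 ++ [pvNbr size c d]) := by
        simp only [pvDfsStep]
        rw [if_pos hc]
      rw [hstep] at ht hl ⊢
      refine ⟨k + 1, ?_, ?_⟩
      · rw [ht, pvSeenCnt_add array st.1 (pvNbr size c d) hnm
          (pvInShape_of_get3_false array _ hc.2)]
        omega
      · rw [hl]; simp; omega
    · have hstep : pvDfsStep array size c st d = st := by
        simp only [pvDfsStep]
        rw [if_neg hc]
      rw [hstep] at ht hl ⊢
      exact ⟨k, ht, hl⟩

-- the model's inner loop (pop from the END of the list)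
def pvDfs (array : List (List (List Bool))) (size : Int) (seen : PySem.Set (Int × Int × Int))
    (stack : List (Int × Int × Int)) (n : Int) : PySem.Set (Int × Int × Int) × Int :=
  match stack with
  | [] => (seen, n)
  | c :: cs =>
    let p := (c :: cs).getLast (List.cons_ne_nil c cs)
    let rest := (c :: cs).dropLast
    let st := pvDirs.foldl (pvDfsStep array size p) (seen, rest)
    pvDfs array size st.1 st.2 (n + 1)
termination_by (pvShape array - pvSeenCnt array seen, stack.length)
decreasing_by
  obtain ⟨k, ht, hl⟩ := pvDfsFold_term array size ((c :: cs).getLast (List.cons_ne_nil c cs))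
    pvDirs (seen, (c :: cs).dropLast)
  have hb := pvSeenCnt_le_pvShape array
    (pvDirs.foldl (pvDfsStep array size ((c :: cs).getLast (List.cons_ne_nil c cs)))
      (seen, (c :: cs).dropLast)).1
  dsimp only at ht hl hb ⊢
  simp only [List.length_dropLast, List.length_cons] at *
  rcases Nat.eq_zero_or_pos k with h0 | hp
  · apply Prod.Lex.right' <;> omega
  · apply Prod.Lex.left; omega

-- internal reference model (proof device only): flattened-index scan with a seen set
def pvModel (array : List (List (List Bool))) (size : Int) : Int :=
  let st := (PySem.List.pyRange 0 (size ^ 3) 1).foldl (fun st i =>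
      let x := PySem.Int.floordiv i (size * size)
      let y := PySem.Int.mod (PySem.Int.floordiv i size) size
      let z := PySem.Int.mod i size
      if PySem.Set.contains st.1 (x, y, z) = false ∧ pvGet3 array x y z = false then
        let seen := PySem.Set.add st.1 (x, y, z)
        let r := pvDfs array size seen [(x, y, z)] 0
        (r.1, max st.2 r.2)
      else st) ((PySem.Set.empty : PySem.Set (Int × Int × Int)), (0 : Int))
  st.2

def pvBox (s : Int) (p : Int × Int × Int) : Prop :=
  0 ≤ p.1 ∧ p.1 < s ∧ 0 ≤ p.2.1 ∧ p.2.1 < s ∧ 0 ≤ p.2.2 ∧ p.2.2 < s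

def pvShaped (m : Nat) (g : List (List (List Bool))) : Prop :=
  g.length = m ∧ ∀ p ∈ g, p.length = m ∧ ∀ r ∈ p, r.length = m

lemma pvDirBounds (d : Int × Int × Int) (hd : d ∈ pvDirs) :
    -1 ≤ d.1 ∧ d.1 ≤ 1 ∧ -1 ≤ d.2.1 ∧ d.2.1 ≤ 1 ∧ -1 ≤ d.2.2 ∧ d.2.2 ≤ 1 := by
  fin_cases hd <;> norm_num

lemma pvClampMod (s x d : Int) (hs : 1 ≤ s) (h0 : 0 ≤ x) (h1 : x < s)
    (hd0 : -1 ≤ d) (hd1 : d ≤ 1) : pvClamp s (x + d) = PySem.Int.mod (x + d) s := by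
  rw [PySem.Int.mod_eq_emod_of_pos (by omega)]
  have hm1 : (x + d) % s = if x + d < 0 then s - 1 else if x + d ≥ s then 0 else x + d := by
    by_cases hneg : x + d < 0
    · have hxd : x + d = -1 := by omega
      rw [if_pos hneg, hxd]
      calc (-1 : Int) % s = (-1 + s * 1) % s := (Int.add_mul_emod_self_left (-1) s 1).symm
        _ = (s - 1) % s := by ring_nf
        _ = s - 1 := Int.emod_eq_of_lt (by omega) (by omega)
    · by_cases hge : x + d ≥ s
      · have hxd : x + d = s := by omega
        rw [if_neg hneg, if_pos hge, hxd, Int.emod_self]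
      · rw [if_neg hneg, if_neg hge]
        exact Int.emod_eq_of_lt (by omega) (by omega)
  unfold pvClamp
  rw [hm1]

lemma pvClampNbr (s : Int) (c d : Int × Int × Int) (hs : 1 ≤ s) (hc : pvBox s c)
    (hd : d ∈ pvDirs) :
    (pvClamp s (c.1 + d.1), pvClamp s (c.2.1 + d.2.1), pvClamp s (c.2.2 + d.2.2)) =
      pvNbr s c d := by
  obtain ⟨b1, b2, b3, b4, b5, b6⟩ := pvDirBounds d hd
  obtain ⟨h1, h2, h3, h4, h5, h6⟩ := hc
  unfold pvNbr
  rw [pvClampMod s c.1 d.1 hs h1 h2 b1 b2, pvClampMod s c.2.1 d.2.1 hs h3 h4 b3 b4,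
    pvClampMod s c.2.2 d.2.2 hs h5 h6 b5 b6]

lemma pvNbr_box (s : Int) (c d : Int × Int × Int) (hs : 1 ≤ s) : pvBox s (pvNbr s c d) := by
  unfold pvNbr pvBox
  have h1 := PySem.Int.mod_nonneg (c.1 + d.1) (b := s) (by omega)
  have h2 := PySem.Int.mod_lt (c.1 + d.1) (b := s) (by omega)
  have h3 := PySem.Int.mod_nonneg (c.2.1 + d.2.1) (b := s) (by omega)
  have h4 := PySem.Int.mod_lt (c.2.1 + d.2.1) (b := s) (by omega)
  have h5 := PySem.Int.mod_nonneg (c.2.2 + d.2.2) (b := s) (by omega)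
  have h6 := PySem.Int.mod_lt (c.2.2 + d.2.2) (b := s) (by omega)
  exact ⟨h1, h2, h3, h4, h5, h6⟩

lemma pvShaped_inShape_iff (m : Nat) (g : List (List (List Bool))) (hg : pvShaped m g)
    (p : Int × Int × Int) : pvInShape g p ↔ pvBox (m : Int) p := by
  obtain ⟨hlen, hrows⟩ := hg
  unfold pvInShape pvBox
  constructor
  · rintro ⟨h1, h2, h3, h4, h5, h6⟩
    rw [hlen] at h4
    have hp : g.getD p.1.toNat [] ∈ g := by
      rw [List.getD_eq_getElem _ _ (by omega : p.1.toNat < g.length)]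
      exact List.getElem_mem _
    obtain ⟨hplen, hrlen⟩ := hrows _ hp
    rw [hplen] at h5
    have hrm : (g.getD p.1.toNat []).getD p.2.1.toNat [] ∈ g.getD p.1.toNat [] := by
      rw [List.getD_eq_getElem _ _ (by omega : p.2.1.toNat < (g.getD p.1.toNat []).length)]
      exact List.getElem_mem _
    rw [hrlen _ hrm] at h6
    omega
  · rintro ⟨h1, h2, h3, h4, h5, h6⟩
    refine ⟨h1, h3, h5, by omega, ?_, ?_⟩
    · have hp : g.getD p.1.toNat [] ∈ g := by
        rw [List.getD_eq_getElem _ _ (by omega : p.1.toNat < g.length)]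
        exact List.getElem_mem _
      rw [(hrows _ hp).1]; omega
    · have hp : g.getD p.1.toNat [] ∈ g := by
        rw [List.getD_eq_getElem _ _ (by omega : p.1.toNat < g.length)]
        exact List.getElem_mem _
      obtain ⟨hplen, hrlen⟩ := hrows _ hp
      have hrm : (g.getD p.1.toNat []).getD p.2.1.toNat [] ∈ g.getD p.1.toNat [] := by
        rw [List.getD_eq_getElem _ _ (by omega : p.2.1.toNat < (g.getD p.1.toNat []).length)]
        exact List.getElem_mem _
      rw [hrlen _ hrm]; omega

lemma pvShaped_pvSet3 (m : Nat) (g : List (List (List Bool))) (x y z : Int)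
    (h : pvGet3 g x y z = false) (hg : pvShaped m g) : pvShaped m (pvSet3 g x y z) := by
  obtain ⟨p, r, hx, hy, hz, hgx, hgy, hgz⟩ := pvGet3_false_elim g x y z h
  obtain ⟨hlx, hvx⟩ := List.getElem?_eq_some_iff.mp hgx
  obtain ⟨hly, hvy⟩ := List.getElem?_eq_some_iff.mp hgy
  obtain ⟨hlz, hvz⟩ := List.getElem?_eq_some_iff.mp hgz
  obtain ⟨hlen, hrows⟩ := hg
  rw [pvSet3_eq g x y z h p r hgx hgy]
  refine ⟨by rw [List.length_set]; exact hlen, ?_⟩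
  intro q hq
  rcases List.mem_or_eq_of_mem_set hq with hq | rfl
  · exact hrows q hq
  · have hpmem : p ∈ g := hvx ▸ List.getElem_mem hlx
    obtain ⟨hplen, hrlen⟩ := hrows p hpmem
    refine ⟨by rw [List.length_set]; exact hplen, ?_⟩
    intro rr hrr
    rcases List.mem_or_eq_of_mem_set hrr with hrr | rfl
    · exact hrlen rr hrr
    · have hrmem : r ∈ p := hvy ▸ List.getElem_mem hly
      rw [List.length_set]
      exact hrlen r hrmem

lemma pvGet3_pvSet3 (g : List (List (List Bool))) (x y z : Int)
    (h : pvGet3 g x y z = false) (a b c : Int) :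
    pvGet3 (pvSet3 g x y z) a b c =
      if a = x ∧ b = y ∧ c = z then true else pvGet3 g a b c := by
  obtain ⟨p, r, hx, hy, hz, hgx, hgy, hgz⟩ := pvGet3_false_elim g x y z h
  obtain ⟨hlx, hvx⟩ := List.getElem?_eq_some_iff.mp hgx
  obtain ⟨hly, hvy⟩ := List.getElem?_eq_some_iff.mp hgy
  obtain ⟨hlz, hvz⟩ := List.getElem?_eq_some_iff.mp hgz
  rw [pvSet3_eq g x y z h p r hgx hgy]
  by_cases heq : a = x ∧ b = y ∧ c = z
  · obtain ⟨rfl, rfl, rfl⟩ := heq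
    rw [if_pos ⟨rfl, rfl, rfl⟩]
    unfold pvGet3
    rw [if_pos ⟨hx, hy, hz⟩]
    rw [List.getElem?_set_self hlx]
    simp only [Option.bind_some]
    rw [List.getElem?_set_self hly]
    simp only [Option.bind_some]
    rw [List.getElem?_set_self hlz]
    rfl
  · rw [if_neg heq]
    unfold pvGet3
    by_cases hnn : 0 ≤ a ∧ 0 ≤ b ∧ 0 ≤ c
    · rw [if_pos hnn, if_pos hnn]
      by_cases hax : a.toNat = x.toNat
      · have haxe : a = x := by omega
        subst haxe
        rw [List.getElem?_set_self hlx, hgx]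
        simp only [Option.bind_some]
        by_cases hby : b.toNat = y.toNat
        · have hbye : b = y := by omega
          subst hbye
          rw [List.getElem?_set_self hly, hgy]
          simp only [Option.bind_some]
          have hcz : c.toNat ≠ z.toNat := by
            intro hcc
            exact heq ⟨rfl, rfl, by omega⟩
          rw [List.getElem?_set_ne (Ne.symm hcz)]
        · rw [List.getElem?_set_ne (Ne.symm hby)]
      · rw [List.getElem?_set_ne (Ne.symm hax)]
    · rw [if_neg hnn, if_neg hnn]

lemma pvCountRow (r : List Bool) :
    (List.range r.length).countP (fun z => r.getD z false) = r.countP id := by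
  induction r with
  | nil => simp
  | cons x t ih =>
    rw [List.length_cons, List.range_succ_eq_map, List.countP_cons]
    rw [List.countP_map]
    have hcomp : ((fun z => (x :: t).getD z false) ∘ Nat.succ) = fun z => t.getD z false := by
      funext z
      simp [List.getD_cons_succ]
    rw [hcomp, ih]
    cases x <;> simp [List.countP_cons]

lemma pvGet3_cast (g : List (List (List Bool))) (x y z : Nat) (hx : x < g.length)
    (hy : y < (g.getD x []).length) (hz : z < ((g.getD x []).getD y []).length) :
    pvGet3 g (x : Int) (y : Int) (z : Int) = ((g.getD x []).getD y []).getD z false := by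
  unfold pvGet3
  rw [if_pos ⟨Int.natCast_nonneg x, Int.natCast_nonneg y, Int.natCast_nonneg z⟩]
  simp only [Int.toNat_natCast]
  rw [List.getElem?_eq_getElem hx]
  simp only [Option.bind_some]
  rw [← List.getD_eq_getElem g [] hx, List.getElem?_eq_getElem hy]
  simp only [Option.bind_some]
  rw [← List.getD_eq_getElem (g.getD x []) [] hy, List.getElem?_eq_getElem hz]
  simp only [Option.getD_some]
  rw [← List.getD_eq_getElem ((g.getD x []).getD y []) false hz]

lemma pvTrue_eq_countP (g : List (List (List Bool))) :
    pvTrue g = (pvCells g).countP fun p => pvGet3 g p.1 p.2.1 p.2.2 := by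
  unfold pvCells pvTrue
  rw [List.countP_flatMap]
  have h1 : ∀ x ∈ List.range g.length,
      (List.countP (fun p => pvGet3 g p.1 p.2.1 p.2.2) ∘ fun x_1 =>
        (List.range (g.getD x_1 []).length).flatMap fun y =>
          (List.range ((g.getD x_1 []).getD y []).length).map fun (z : Nat) =>
            ((x_1 : Int), (y : Int), (z : Int))) x
      = ((g.getD x []).map (List.countP id)).sum := by
    intro x hx
    rw [List.mem_range] at hx
    simp only [Function.comp_apply]
    rw [List.countP_flatMap]
    have h2 : ∀ y ∈ List.range (g.getD x []).length,
        (List.countP (fun p => pvGet3 g p.1 p.2.1 p.2.2) ∘ fun y_1 =>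
          (List.range ((g.getD x []).getD y_1 []).length).map fun (z : Nat) =>
            ((x : Int), (y_1 : Int), (z : Int))) y
        = List.countP id ((g.getD x []).getD y []) := by
      intro y hy
      rw [List.mem_range] at hy
      simp only [Function.comp_apply]
      rw [List.countP_map]
      have h3 : ∀ z ∈ List.range ((g.getD x []).getD y []).length,
          (((fun p => pvGet3 g p.1 p.2.1 p.2.2) ∘ fun (z : Nat) =>
            ((x : Int), (y : Int), (z : Int))) z = true ↔
            (fun z => ((g.getD x []).getD y []).getD z false) z = true) := by
        intro z hz
        rw [List.mem_range] at hz
        simp only [Function.comp_apply]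
        rw [pvGet3_cast g x y z hx hy hz]
      rw [List.countP_congr h3]
      exact pvCountRow ((g.getD x []).getD y [])
    rw [List.map_congr_left h2]
    exact pvSumMapRangeGetD (g.getD x []) (List.countP id) []
  rw [List.map_congr_left h1]
  exact (pvSumMapRangeGetD g (fun p => (p.map (List.countP id)).sum) []).symm

lemma pvCells_nodup (g : List (List (List Bool))) : (pvCells g).Nodup := by
  unfold pvCells
  rw [List.nodup_flatMap]
  constructor
  · intro x _
    rw [List.nodup_flatMap]
    constructor
    · intro y _
      refine List.Nodup.map ?_ (List.nodup_range)
      intro a b hab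
      simpa using hab
    · refine List.Pairwise.imp ?_ (List.pairwise_lt_range)
      intro y y' hyy
      intro t ht ht'
      rw [List.mem_map] at ht ht'
      obtain ⟨z, _, rfl⟩ := ht
      obtain ⟨z', _, he⟩ := ht'
      rw [Prod.mk.injEq, Prod.mk.injEq] at he
      omega
  · refine List.Pairwise.imp ?_ (List.pairwise_lt_range)
    intro x x' hxx
    intro t ht ht'
    rw [List.mem_flatMap] at ht ht'
    obtain ⟨y, _, ht⟩ := ht
    obtain ⟨y', _, ht'⟩ := ht'
    rw [List.mem_map] at ht ht'
    obtain ⟨z, _, rfl⟩ := ht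
    obtain ⟨z', _, he⟩ := ht'
    rw [Prod.mk.injEq, Prod.mk.injEq] at he
    omega

lemma pvCount_bridge (m : Nat) (v : List (List (List Bool))) (seen : List (Int × Int × Int))
    (hsh : pvShaped m v) (hnd : seen.Nodup) (hbx : ∀ p ∈ seen, pvBox (m : Int) p)
    (hiff : ∀ p, pvBox (m : Int) p → (pvGet3 v p.1 p.2.1 p.2.2 = true ↔ p ∈ seen)) :
    pvTrue v = seen.length := by
  rw [pvTrue_eq_countP, List.countP_eq_length_filter]
  have hperm : ((pvCells v).filter fun p => pvGet3 v p.1 p.2.1 p.2.2).Perm seen := by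
    rw [List.perm_ext_iff_of_nodup ((pvCells_nodup v).filter _) hnd]
    intro p
    rw [List.mem_filter, pvMem_pvCells, pvShaped_inShape_iff m v hsh]
    constructor
    · rintro ⟨hbox, hget⟩
      exact (hiff p hbox).mp hget
    · intro hp
      exact ⟨hbx p hp, (hiff p (hbx p hp)).mpr hp⟩
  exact hperm.length_eq

lemma pvBfsFold_spec (a : List (List (List Bool))) (s : Int) (hs : 1 ≤ s)
    (c : Int × Int × Int) (hc : pvBox s c) :
    ∀ (ds : List (Int × Int × Int)), (∀ d ∈ ds, d ∈ pvDirs) →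
    ∀ (v : List (List (List Bool))) (q : List (Int × Int × Int)),
    ∃ added : List (Int × Int × Int),
      (ds.foldl (pvBfsStep a s c) (v, q)).2 = q ++ added ∧
      (∀ x y z, pvGet3 (ds.foldl (pvBfsStep a s c) (v, q)).1 x y z = true ↔
        (pvGet3 v x y z = true ∨ (x, y, z) ∈ added)) ∧
      pvTrue (ds.foldl (pvBfsStep a s c) (v, q)).1 = pvTrue v + added.length ∧
      (∀ m, pvShaped m v → pvShaped m (ds.foldl (pvBfsStep a s c) (v, q)).1) ∧
      (∀ p ∈ added, (∃ d ∈ ds, p = pvNbr s c d) ∧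
        pvGet3 a p.1 p.2.1 p.2.2 = false ∧ pvGet3 v p.1 p.2.1 p.2.2 = false) ∧
      (∀ d ∈ ds, pvGet3 a (pvNbr s c d).1 (pvNbr s c d).2.1 (pvNbr s c d).2.2 = false →
        pvGet3 (ds.foldl (pvBfsStep a s c) (v, q)).1 (pvNbr s c d).1 (pvNbr s c d).2.1
          (pvNbr s c d).2.2 = true) := by
  intro ds
  induction ds with
  | nil =>
    intro _ v q
    exact ⟨[], by simp, by simp, by simp, fun m hm => hm, by simp, by simp⟩
  | cons d ds ih =>
    intro hds v q
    have hd : d ∈ pvDirs := hds d List.mem_cons_self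
    have hds' : ∀ d' ∈ ds, d' ∈ pvDirs := fun d' hd' => hds d' (List.mem_cons_of_mem d hd')
    have hcn := pvClampNbr s c d hs hc hd
    have e1 : pvClamp s (c.1 + d.1) = (pvNbr s c d).1 := by rw [← hcn]
    have e2 : pvClamp s (c.2.1 + d.2.1) = (pvNbr s c d).2.1 := by rw [← hcn]
    have e3 : pvClamp s (c.2.2 + d.2.2) = (pvNbr s c d).2.2 := by rw [← hcn]
    simp only [List.foldl_cons]
    by_cases hcond : pvGet3 v (pvNbr s c d).1 (pvNbr s c d).2.1 (pvNbr s c d).2.2 = false ∧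
        pvGet3 a (pvNbr s c d).1 (pvNbr s c d).2.1 (pvNbr s c d).2.2 = false
    · have hstep : pvBfsStep a s c (v, q) d =
          (pvSet3 v (pvNbr s c d).1 (pvNbr s c d).2.1 (pvNbr s c d).2.2,
            q ++ [pvNbr s c d]) := by
        simp only [pvBfsStep, e1, e2, e3]
        rw [if_pos hcond]
      rw [hstep]
      obtain ⟨added, ih1, ih2, ih3, ih4, ih5, ih6⟩ := ih hds'
        (pvSet3 v (pvNbr s c d).1 (pvNbr s c d).2.1 (pvNbr s c d).2.2) (q ++ [pvNbr s c d])
      refine ⟨pvNbr s c d :: added, ?_, ?_, ?_, ?_, ?_, ?_⟩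
      · rw [ih1, List.append_assoc, List.singleton_append]
      · intro x y z
        rw [ih2 x y z, pvGet3_pvSet3 _ _ _ _ hcond.1 x y z]
        by_cases hxyz : x = (pvNbr s c d).1 ∧ y = (pvNbr s c d).2.1 ∧ z = (pvNbr s c d).2.2
        · obtain ⟨rfl, rfl, rfl⟩ := hxyz
          rw [if_pos ⟨rfl, rfl, rfl⟩]
          simp
        · rw [if_neg hxyz]
          constructor
          · rintro (hv | hadd)
            · exact Or.inl hv
            · exact Or.inr (List.mem_cons_of_mem _ hadd)
          · rintro (hv | hmem)
            · exact Or.inl hv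
            · rcases List.mem_cons.mp hmem with heq | hadd
              · exact absurd ⟨congrArg (fun t => t.1) heq, congrArg (fun t => t.2.1) heq,
                  congrArg (fun t => t.2.2) heq⟩ hxyz
              · exact Or.inr hadd
      · rw [ih3, pvSet3_pvTrue _ _ _ _ hcond.1, List.length_cons]
        omega
      · intro m hm
        exact ih4 m (pvShaped_pvSet3 m v _ _ _ hcond.1 hm)
      · intro p hp
        rcases List.mem_cons.mp hp with rfl | hp
        · exact ⟨⟨d, List.mem_cons_self, rfl⟩, hcond.2, hcond.1⟩
        · obtain ⟨⟨d', hd', hpe⟩, hga, hgv⟩ := ih5 p hp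
          refine ⟨⟨d', List.mem_cons_of_mem d hd', hpe⟩, hga, ?_⟩
          rw [pvGet3_pvSet3 _ _ _ _ hcond.1 p.1 p.2.1 p.2.2] at hgv
          by_cases hpn : p.1 = (pvNbr s c d).1 ∧ p.2.1 = (pvNbr s c d).2.1 ∧
              p.2.2 = (pvNbr s c d).2.2
          · rw [if_pos hpn] at hgv
            exact absurd hgv (by simp)
          · rw [if_neg hpn] at hgv
            exact hgv
      · intro d' hd' hga
        rcases List.mem_cons.mp hd' with rfl | hd'
        · rw [ih2]
          left
          rw [pvGet3_pvSet3 _ _ _ _ hcond.1]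
          rw [if_pos ⟨rfl, rfl, rfl⟩]
        · exact ih6 d' hd' hga
    · have hstep : pvBfsStep a s c (v, q) d = (v, q) := by
        simp only [pvBfsStep, e1, e2, e3]
        rw [if_neg hcond]
      rw [hstep]
      obtain ⟨added, ih1, ih2, ih3, ih4, ih5, ih6⟩ := ih hds' v q
      refine ⟨added, ih1, ih2, ih3, ih4, ?_, ?_⟩
      · intro p hp
        obtain ⟨⟨d', hd', hpe⟩, hga, hgv⟩ := ih5 p hp
        exact ⟨⟨d', List.mem_cons_of_mem d hd', hpe⟩, hga, hgv⟩
      · intro d' hd' hga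
        rcases List.mem_cons.mp hd' with rfl | hd'
        · have hv : pvGet3 v (pvNbr s c d').1 (pvNbr s c d').2.1 (pvNbr s c d').2.2 = true := by
            rcases Bool.eq_false_or_eq_true
              (pvGet3 v (pvNbr s c d').1 (pvNbr s c d').2.1 (pvNbr s c d').2.2) with h | h
            · exact h
            · exact absurd ⟨h, hga⟩ hcond
          rw [ih2]
          exact Or.inl hv
        · exact ih6 d' hd' hga

lemma pvDfsFold_spec (a : List (List (List Bool))) (s : Int) (hs : 1 ≤ s)
    (c : Int × Int × Int) (hc : pvBox s c) :
    ∀ (ds : List (Int × Int × Int)), (∀ d ∈ ds, d ∈ pvDirs) →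
    ∀ (seen : PySem.Set (Int × Int × Int)) (q : List (Int × Int × Int)),
    ∃ added : List (Int × Int × Int),
      (ds.foldl (pvDfsStep a s c) (seen, q)).2 = q ++ added ∧
      (ds.foldl (pvDfsStep a s c) (seen, q)).1 = seen ++ added ∧
      (seen.Nodup → (seen ++ added).Nodup) ∧
      (∀ p ∈ added, (∃ d ∈ ds, p = pvNbr s c d) ∧
        pvGet3 a p.1 p.2.1 p.2.2 = false ∧ p ∉ seen) ∧
      (∀ d ∈ ds, pvGet3 a (pvNbr s c d).1 (pvNbr s c d).2.1 (pvNbr s c d).2.2 = false →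
        pvNbr s c d ∈ (ds.foldl (pvDfsStep a s c) (seen, q)).1) := by
  intro ds
  induction ds with
  | nil =>
    intro _ seen q
    exact ⟨[], by simp, by simp, fun h => by simpa using h, by simp, by simp⟩
  | cons d ds ih =>
    intro hds seen q
    have hd : d ∈ pvDirs := hds d List.mem_cons_self
    have hds' : ∀ d' ∈ ds, d' ∈ pvDirs := fun d' hd' => hds d' (List.mem_cons_of_mem d hd')
    simp only [List.foldl_cons]
    by_cases hcond : PySem.Set.contains seen (pvNbr s c d) = false ∧
        pvGet3 a (pvNbr s c d).1 (pvNbr s c d).2.1 (pvNbr s c d).2.2 = false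
    · have hnm : pvNbr s c d ∉ seen := by
        intro hm
        rw [(PySem.Set.contains_iff _ _).mpr hm] at hcond
        exact absurd hcond.1 (by simp)
      have hstep : pvDfsStep a s c (seen, q) d =
          (seen ++ [pvNbr s c d], q ++ [pvNbr s c d]) := by
        simp only [pvDfsStep]
        rw [if_pos hcond, PySem.Set.add_of_not_mem hnm]
      rw [hstep]
      obtain ⟨added, ih1, ih2, ih3, ih4, ih5⟩ := ih hds'
        (seen ++ [pvNbr s c d]) (q ++ [pvNbr s c d])
      refine ⟨pvNbr s c d :: added, ?_, ?_, ?_, ?_, ?_⟩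
      · rw [ih1, List.append_assoc, List.singleton_append]
      · rw [ih2, List.append_assoc, List.singleton_append]
      · intro hnd
        have := ih3 (by
          rw [List.nodup_append]
          refine ⟨hnd, List.nodup_singleton _, ?_⟩
          intro t ht b hb
          rw [List.mem_singleton] at hb
          subst hb
          intro he
          exact hnm (he ▸ ht))
        rwa [List.append_assoc, List.singleton_append] at this
      · intro p hp
        rcases List.mem_cons.mp hp with rfl | hp
        · exact ⟨⟨d, List.mem_cons_self, rfl⟩, hcond.2, hnm⟩
        · obtain ⟨⟨d', hd', hpe⟩, hga, hnmem⟩ := ih4 p hp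
          refine ⟨⟨d', List.mem_cons_of_mem d hd', hpe⟩, hga, ?_⟩
          intro hmem
          exact hnmem (List.mem_append_left _ hmem)
      · intro d' hd' hga
        rcases List.mem_cons.mp hd' with rfl | hd'
        · rw [ih2]
          exact List.mem_append_left _ (List.mem_append_right _ List.mem_cons_self)
        · exact ih5 d' hd' hga
    · have hstep : pvDfsStep a s c (seen, q) d = (seen, q) := by
        simp only [pvDfsStep]
        rw [if_neg hcond]
      rw [hstep]
      obtain ⟨added, ih1, ih2, ih3, ih4, ih5⟩ := ih hds' seen q
      refine ⟨added, ih1, ih2, ih3, ?_, ?_⟩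
      · intro p hp
        obtain ⟨⟨d', hd', hpe⟩, hga, hnmem⟩ := ih4 p hp
        exact ⟨⟨d', List.mem_cons_of_mem d hd', hpe⟩, hga, hnmem⟩
      · intro d' hd' hga
        rcases List.mem_cons.mp hd' with rfl | hd'
        · have hmem : pvNbr s c d' ∈ seen := by
            rcases Bool.eq_false_or_eq_true (PySem.Set.contains seen (pvNbr s c d')) with h | h
            · exact (PySem.Set.contains_iff _ _).mp h
            · exact absurd ⟨h, hga⟩ hcond
          rw [ih2]
          exact List.mem_append_left _ hmem
        · exact ih5 d' hd' hga

lemma pvBfs_main (a : List (List (List Bool))) (s : Int) (hs : 1 ≤ s)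
    (bp : Int × Int × Int → Prop) :
    ∀ (v : List (List (List Bool))) (q : List (Int × Int × Int)) (n : Int),
    pvShaped s.toNat v →
    (∀ p ∈ q, pvBox s p ∧ pvGet3 v p.1 p.2.1 p.2.2 = true ∧ ¬ bp p) →
    (∀ p, pvBox s p → bp p → pvGet3 v p.1 p.2.1 p.2.2 = true) →
    (∀ p, pvBox s p → pvGet3 v p.1 p.2.1 p.2.2 = true → ¬ bp p → p ∉ q →
      ∀ d ∈ pvDirs, pvGet3 a (pvNbr s p d).1 (pvNbr s p d).2.1 (pvNbr s p d).2.2 = false →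
        pvGet3 v (pvNbr s p d).1 (pvNbr s p d).2.1 (pvNbr s p d).2.2 = true) →
    pvShaped s.toNat (pvBfs a s v q n).1 ∧
    (∀ x y z, pvGet3 v x y z = true → pvGet3 (pvBfs a s v q n).1 x y z = true) ∧
    (∀ p, pvBox s p → pvGet3 (pvBfs a s v q n).1 p.1 p.2.1 p.2.2 = true → ¬ bp p →
      ∀ d ∈ pvDirs, pvGet3 a (pvNbr s p d).1 (pvNbr s p d).2.1 (pvNbr s p d).2.2 = false →
        pvGet3 (pvBfs a s v q n).1 (pvNbr s p d).1 (pvNbr s p d).2.1 (pvNbr s p d).2.2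
          = true) ∧
    (∀ U : (Int × Int × Int) → Prop,
      (∀ p, pvBox s p → pvGet3 v p.1 p.2.1 p.2.2 = true → U p) →
      (∀ p, pvBox s p → U p → ¬ bp p → ∀ d ∈ pvDirs,
        pvGet3 a (pvNbr s p d).1 (pvNbr s p d).2.1 (pvNbr s p d).2.2 = false →
          U (pvNbr s p d)) →
      ∀ p, pvBox s p → pvGet3 (pvBfs a s v q n).1 p.1 p.2.1 p.2.2 = true → U p) ∧
    ((pvBfs a s v q n).2 = n + q.length + (pvTrue (pvBfs a s v q n).1 : Int) - pvTrue v ∧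
      pvTrue v ≤ pvTrue (pvBfs a s v q n).1) := by
  intro v q n
  fun_induction pvBfs a s v q n with
  | case1 v n =>
    intro hsh hq hbase hcl
    refine ⟨hsh, fun x y z h => h, ?_, ?_, by simp, le_refl _⟩
    · intro p hbox hget hbp d hd hga
      exact hcl p hbox hget hbp (List.not_mem_nil) d hd hga
    · intro U hU0 hUcl p hbox hget
      exact hU0 p hbox hget
  | case2 v n c rest st ih =>
    intro hsh hq hbase hcl
    obtain ⟨hcbox, hcget, hcbp⟩ := hq c List.mem_cons_self
    obtain ⟨added, f1, f2, f3, f4, f5, f6⟩ :=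
      pvBfsFold_spec a s hs c hcbox pvDirs (fun d hd => hd) v rest
    have haddbox : ∀ p ∈ added, pvBox s p := by
      intro p hp
      obtain ⟨⟨d, _, rfl⟩, _, _⟩ := f5 p hp
      exact pvNbr_box s c d hs
    have haddbp : ∀ p ∈ added, ¬ bp p := by
      intro p hp hbp
      obtain ⟨_, _, hgv⟩ := f5 p hp
      rw [hbase p (haddbox p hp) hbp] at hgv
      exact absurd hgv (by simp)
    have hq' : ∀ p ∈ st.2, pvBox s p ∧ pvGet3 st.1 p.1 p.2.1 p.2.2 = true ∧ ¬ bp p := by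
      intro p hp
      rw [f1] at hp
      rcases List.mem_append.mp hp with hp | hp
      · obtain ⟨h1, h2, h3⟩ := hq p (List.mem_cons_of_mem c hp)
        exact ⟨h1, (f2 p.1 p.2.1 p.2.2).mpr (Or.inl h2), h3⟩
      · exact ⟨haddbox p hp, (f2 p.1 p.2.1 p.2.2).mpr (Or.inr (by
          rcases p with ⟨p1, p2, p3⟩; exact hp)), haddbp p hp⟩
    have hbase' : ∀ p, pvBox s p → bp p → pvGet3 st.1 p.1 p.2.1 p.2.2 = true := by
      intro p hbox hbp
      exact (f2 p.1 p.2.1 p.2.2).mpr (Or.inl (hbase p hbox hbp))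
    have hcl' : ∀ p, pvBox s p → pvGet3 st.1 p.1 p.2.1 p.2.2 = true → ¬ bp p → p ∉ st.2 →
        ∀ d ∈ pvDirs, pvGet3 a (pvNbr s p d).1 (pvNbr s p d).2.1 (pvNbr s p d).2.2 = false →
          pvGet3 st.1 (pvNbr s p d).1 (pvNbr s p d).2.1 (pvNbr s p d).2.2 = true := by
      intro p hbox hget hbp hnq d hd hga
      rcases (f2 p.1 p.2.1 p.2.2).mp hget with hgv | hmem
      · by_cases hpc : p = c
        · subst hpc
          exact f6 d hd hga
        · have hnrest : p ∉ rest := by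
            intro hr
            apply hnq
            rw [f1]
            exact List.mem_append_left _ hr
          have hnqq : p ∉ c :: rest := by
            intro hm
            rcases List.mem_cons.mp hm with h | h
            · exact hpc h
            · exact hnrest h
          have := hcl p hbox hgv hbp hnqq d hd hga
          exact (f2 _ _ _).mpr (Or.inl this)
      · exfalso
        apply hnq
        rw [f1]
        apply List.mem_append_right
        rcases p with ⟨p1, p2, p3⟩
        exact hmem
    obtain ⟨g1, g2, g3, g4, g5, g6⟩ := ih (f4 s.toNat hsh) hq' hbase' hcl'
    refine ⟨g1, ?_, g3, ?_, ?_, ?_⟩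
    · intro x y z h
      exact g2 x y z ((f2 x y z).mpr (Or.inl h))
    · intro U hU0 hUcl p hbox hget
      refine g4 U ?_ hUcl p hbox hget
      intro p' hbox' hget'
      rcases (f2 p'.1 p'.2.1 p'.2.2).mp hget' with hgv | hmem
      · exact hU0 p' hbox' hgv
      · have hmem' : p' ∈ added := by rcases p' with ⟨p1, p2, p3⟩; exact hmem
        obtain ⟨⟨d, hd, rfl⟩, hga, _⟩ := f5 _ hmem'
        exact hUcl c hcbox (hU0 c hcbox hcget) hcbp d hd hga
    · rw [g5]
      rw [f1, f3]
      simp only [List.length_append, List.length_cons]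
      push_cast
      omega
    · calc pvTrue v ≤ pvTrue st.1 := by rw [f3]; omega
        _ ≤ _ := g6

lemma pvDfs_main (a : List (List (List Bool))) (s : Int) (hs : 1 ≤ s)
    (bp : Int × Int × Int → Prop) :
    ∀ (seen : PySem.Set (Int × Int × Int)) (q : List (Int × Int × Int)) (n : Int),
    seen.Nodup →
    (∀ p ∈ seen, pvBox s p) →
    (∀ p ∈ q, pvBox s p ∧ p ∈ seen ∧ ¬ bp p) →
    (∀ p, pvBox s p → bp p → p ∈ seen) →
    (∀ p, pvBox s p → p ∈ seen → ¬ bp p → p ∉ q →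
      ∀ d ∈ pvDirs, pvGet3 a (pvNbr s p d).1 (pvNbr s p d).2.1 (pvNbr s p d).2.2 = false →
        pvNbr s p d ∈ seen) →
    (pvDfs a s seen q n).1.Nodup ∧
    (∀ p ∈ seen, p ∈ (pvDfs a s seen q n).1) ∧
    (∀ p ∈ (pvDfs a s seen q n).1, pvBox s p) ∧
    (∀ p, pvBox s p → p ∈ (pvDfs a s seen q n).1 → ¬ bp p →
      ∀ d ∈ pvDirs, pvGet3 a (pvNbr s p d).1 (pvNbr s p d).2.1 (pvNbr s p d).2.2 = false →
        pvNbr s p d ∈ (pvDfs a s seen q n).1) ∧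
    (∀ U : (Int × Int × Int) → Prop,
      (∀ p ∈ seen, U p) →
      (∀ p, pvBox s p → U p → ¬ bp p → ∀ d ∈ pvDirs,
        pvGet3 a (pvNbr s p d).1 (pvNbr s p d).2.1 (pvNbr s p d).2.2 = false →
          U (pvNbr s p d)) →
      ∀ p ∈ (pvDfs a s seen q n).1, U p) ∧
    ((pvDfs a s seen q n).2 =
        n + q.length + ((pvDfs a s seen q n).1.length : Int) - seen.length ∧
      seen.length ≤ (pvDfs a s seen q n).1.length) := by
  intro seen q n
  fun_induction pvDfs a s seen q n with
  | case1 seen n =>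
    intro hnd hboxseen hq hbase hcl
    refine ⟨hnd, fun p hp => hp, hboxseen, ?_, ?_, by simp, le_refl _⟩
    · intro p hbox hmem hbp d hd hga
      exact hcl p hbox hmem hbp (List.not_mem_nil) d hd hga
    · intro U hU0 hUcl p hp
      exact hU0 p hp
  | case2 seen n c cs pp rest st ih =>
    intro hnd hboxseen hq hbase hcl
    have hqeq : rest ++ [pp] = c :: cs := List.dropLast_append_getLast (List.cons_ne_nil c cs)
    obtain ⟨hppbox, hppmem, hppbp⟩ := hq pp (List.getLast_mem (List.cons_ne_nil c cs))
    obtain ⟨added, f1, f2, f3, f4, f5⟩ :=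
      pvDfsFold_spec a s hs pp hppbox pvDirs (fun d hd => hd) seen rest
    have hrestq : ∀ p ∈ rest, p ∈ c :: cs := fun p hp =>
      (List.dropLast_sublist (c :: cs)).subset hp
    have haddbox : ∀ p ∈ added, pvBox s p := by
      intro p hp
      obtain ⟨⟨d, _, rfl⟩, _, _⟩ := f4 p hp
      exact pvNbr_box s pp d hs
    have haddbp : ∀ p ∈ added, ¬ bp p := by
      intro p hp hbp
      obtain ⟨_, _, hnmem⟩ := f4 p hp
      exact hnmem (hbase p (haddbox p hp) hbp)
    have hmemst : ∀ p, p ∈ st.1 ↔ p ∈ seen ∨ p ∈ added := by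
      intro p
      rw [f2, List.mem_append]
    have hnd' : st.1.Nodup := by rw [f2]; exact f3 hnd
    have hboxseen' : ∀ p ∈ st.1, pvBox s p := by
      intro p hp
      rcases (hmemst p).mp hp with hp | hp
      · exact hboxseen p hp
      · exact haddbox p hp
    have hq' : ∀ p ∈ st.2, pvBox s p ∧ p ∈ st.1 ∧ ¬ bp p := by
      intro p hp
      rw [f1] at hp
      rcases List.mem_append.mp hp with hp | hp
      · obtain ⟨h1, h2, h3⟩ := hq p (hrestq p hp)
        exact ⟨h1, (hmemst p).mpr (Or.inl h2), h3⟩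
      · exact ⟨haddbox p hp, (hmemst p).mpr (Or.inr hp), haddbp p hp⟩
    have hbase' : ∀ p, pvBox s p → bp p → p ∈ st.1 :=
      fun p hbox hbp => (hmemst p).mpr (Or.inl (hbase p hbox hbp))
    have hcl' : ∀ p, pvBox s p → p ∈ st.1 → ¬ bp p → p ∉ st.2 →
        ∀ d ∈ pvDirs, pvGet3 a (pvNbr s p d).1 (pvNbr s p d).2.1 (pvNbr s p d).2.2 = false →
          pvNbr s p d ∈ st.1 := by
      intro p hbox hmem hbp hnq d hd hga
      rcases (hmemst p).mp hmem with hpseen | hpadd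
      · by_cases hppc : p = pp
        · subst hppc
          exact f5 d hd hga
        · have hnrest : p ∉ rest := by
            intro hr
            apply hnq
            rw [f1]
            exact List.mem_append_left _ hr
          have hnqq : p ∉ c :: cs := by
            intro hm
            rw [← hqeq] at hm
            rcases List.mem_append.mp hm with h | h
            · exact hnrest h
            · rw [List.mem_singleton] at h
              exact hppc h
          exact (hmemst _).mpr (Or.inl (hcl p hbox hpseen hbp hnqq d hd hga))
      · exfalso
        apply hnq
        rw [f1]
        exact List.mem_append_right _ hpadd
    obtain ⟨g1, g2, g3, g4, g5, g6, g7⟩ := ih hnd' hboxseen' hq' hbase' hcl'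
    have hlen : rest.length + 1 = (c :: cs).length := by
      show (c :: cs).dropLast.length + 1 = (c :: cs).length
      rw [List.length_dropLast]
      simp
    refine ⟨g1, ?_, g3, g4, ?_, ?_, ?_⟩
    · intro p hp
      exact g2 p ((hmemst p).mpr (Or.inl hp))
    · intro U hU0 hUcl p hp
      refine g5 U ?_ hUcl p hp
      intro p' hp'
      rcases (hmemst p').mp hp' with hp' | hp'
      · exact hU0 p' hp'
      · obtain ⟨⟨d, hd, rfl⟩, hga, _⟩ := f4 p' hp'
        exact hUcl pp hppbox (hU0 pp hppmem) hppbp d hd hga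
    · rw [g6]
      have hl1 : st.2.length = rest.length + added.length := by rw [f1]; simp
      have hl2 : st.1.length = seen.length + added.length := by rw [f2]; simp
      rw [hl1, hl2]
      push_cast
      omega
    · have : seen.length ≤ st.1.length := by rw [f2]; simp
      omega

lemma pvBox_toNatCast (s : Int) (hs : 1 ≤ s) (p : Int × Int × Int) :
    pvBox ((s.toNat : Nat) : Int) p ↔ pvBox s p := by
  rw [Int.toNat_of_nonneg (by omega)]

lemma pvNe_components (p c : Int × Int × Int) (h : p ≠ c) :
    ¬(p.1 = c.1 ∧ p.2.1 = c.2.1 ∧ p.2.2 = c.2.2) := by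
  rintro ⟨h1, h2, h3⟩
  apply h
  rcases p with ⟨p1, p2, p3⟩
  rcases c with ⟨c1, c2, c3⟩
  simp only at h1 h2 h3
  rw [h1, h2, h3]

lemma pvComponent_eq (a : List (List (List Bool))) (s : Int) (hs : 1 ≤ s)
    (v : List (List (List Bool))) (seen : PySem.Set (Int × Int × Int))
    (hsh : pvShaped s.toNat v) (hnd : seen.Nodup) (hboxseen : ∀ p ∈ seen, pvBox s p)
    (hiff : ∀ p, pvBox s p → (pvGet3 v p.1 p.2.1 p.2.2 = true ↔ p ∈ seen))
    (c : Int × Int × Int) (hc : pvBox s c) (hcv : pvGet3 v c.1 c.2.1 c.2.2 = false) :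
    pvShaped s.toNat (pvBfs a s (pvSet3 v c.1 c.2.1 c.2.2) [c] 0).1 ∧
    (pvDfs a s (PySem.Set.add seen c) [c] 0).1.Nodup ∧
    (∀ p ∈ (pvDfs a s (PySem.Set.add seen c) [c] 0).1, pvBox s p) ∧
    (∀ p, pvBox s p → (pvGet3 (pvBfs a s (pvSet3 v c.1 c.2.1 c.2.2) [c] 0).1 p.1 p.2.1 p.2.2
      = true ↔ p ∈ (pvDfs a s (PySem.Set.add seen c) [c] 0).1)) ∧
    (pvBfs a s (pvSet3 v c.1 c.2.1 c.2.2) [c] 0).2 =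
      (pvDfs a s (PySem.Set.add seen c) [c] 0).2 := by
  have hcseen : c ∉ seen := by
    intro hm
    rw [(hiff c hc).mpr hm] at hcv
    exact absurd hcv (by simp)
  have hadd : PySem.Set.add seen c = seen ++ [c] := PySem.Set.add_of_not_mem hcseen
  have hv1get : ∀ x y z, pvGet3 (pvSet3 v c.1 c.2.1 c.2.2) x y z =
      if x = c.1 ∧ y = c.2.1 ∧ z = c.2.2 then true else pvGet3 v x y z :=
    pvGet3_pvSet3 v c.1 c.2.1 c.2.2 hcv
  have hv1c : pvGet3 (pvSet3 v c.1 c.2.1 c.2.2) c.1 c.2.1 c.2.2 = true := by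
    rw [hv1get, if_pos ⟨rfl, rfl, rfl⟩]
  obtain ⟨gA1, gA2, gA3, gA4, gA5, gA6⟩ :=
    pvBfs_main a s hs (fun p => p ∈ seen) (pvSet3 v c.1 c.2.1 c.2.2) [c] 0
      (pvShaped_pvSet3 s.toNat v c.1 c.2.1 c.2.2 hcv hsh)
      (by
        intro p hp
        rw [List.mem_singleton] at hp
        subst hp
        exact ⟨hc, hv1c, hcseen⟩)
      (by
        intro p hbox hbp
        rw [hv1get]
        split
        · rfl
        · exact (hiff p hbox).mpr hbp)
      (by
        intro p hbox hget hbp hnq d hd hga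
        exfalso
        rw [hv1get] at hget
        have hpc : p ≠ c := by
          intro he
          subst he
          exact hnq List.mem_cons_self
        rw [if_neg (pvNe_components p c hpc)] at hget
        exact hbp ((hiff p hbox).mp hget))
  obtain ⟨gB1, gB2, gB3, gB4, gB5, gB6, gB7⟩ :=
    pvDfs_main a s hs (fun p => p ∈ seen) (PySem.Set.add seen c) [c] 0
      (by rw [hadd, List.nodup_append]
          refine ⟨hnd, List.nodup_singleton _, ?_⟩
          intro t ht b hb
          rw [List.mem_singleton] at hb
          subst hb
          intro he
          exact hcseen (he ▸ ht))
      (by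
        intro p hp
        rw [hadd] at hp
        rcases List.mem_append.mp hp with hp | hp
        · exact hboxseen p hp
        · rw [List.mem_singleton] at hp
          subst hp
          exact hc)
      (by
        intro p hp
        rw [List.mem_singleton] at hp
        subst hp
        exact ⟨hc, by rw [hadd]; exact List.mem_append_right _ List.mem_cons_self, hcseen⟩)
      (fun p _ hbp => by rw [hadd]; exact List.mem_append_left _ hbp)
      (by
        intro p hbox hmem hbp hnq d hd hga
        exfalso
        rw [hadd] at hmem
        rcases List.mem_append.mp hmem with hp | hp
        · exact hbp hp
        · rw [List.mem_singleton] at hp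
          subst hp
          exact hnq List.mem_cons_self)
  have hsetiff : ∀ p, pvBox s p →
      (pvGet3 (pvBfs a s (pvSet3 v c.1 c.2.1 c.2.2) [c] 0).1 p.1 p.2.1 p.2.2 = true ↔
        p ∈ (pvDfs a s (PySem.Set.add seen c) [c] 0).1) := by
    intro p hbox
    constructor
    · intro hget
      refine gA4 (fun p => p ∈ (pvDfs a s (PySem.Set.add seen c) [c] 0).1) ?_ ?_ p hbox hget
      · intro p' hbox' hget'
        rw [hv1get] at hget'
        by_cases hpc : p' = c
        · subst hpc
          apply gB2
          rw [hadd]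
          exact List.mem_append_right _ List.mem_cons_self
        · rw [if_neg (pvNe_components p' c hpc)] at hget'
          apply gB2
          rw [hadd]
          exact List.mem_append_left _ ((hiff p' hbox').mp hget')
      · intro p' hbox' hU hbp d hd hga
        exact gB4 p' hbox' hU hbp d hd hga
    · intro hmem
      refine gB5 (fun p => pvGet3 (pvBfs a s (pvSet3 v c.1 c.2.1 c.2.2) [c] 0).1
        p.1 p.2.1 p.2.2 = true) ?_ ?_ p hmem
      · intro p' hp'
        rw [hadd] at hp'
        apply gA2
        rw [hv1get]
        rcases List.mem_append.mp hp' with hp' | hp'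
        · split
          · rfl
          · exact (hiff p' (hboxseen p' hp')).mpr hp'
        · rw [List.mem_singleton] at hp'
          subst hp'
          rw [if_pos ⟨rfl, rfl, rfl⟩]
      · intro p' hbox' hU hbp d hd hga
        exact gA3 p' hbox' hU hbp d hd hga
  refine ⟨gA1, gB1, gB3, hsetiff, ?_⟩
  have hT1 : pvTrue (pvSet3 v c.1 c.2.1 c.2.2) = pvTrue v + 1 :=
    pvSet3_pvTrue v c.1 c.2.1 c.2.2 hcv
  have hTv : pvTrue v = seen.length :=
    pvCount_bridge s.toNat v seen hsh hnd
      (fun p hp => (pvBox_toNatCast s hs p).mpr (hboxseen p hp))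
      (fun p hbox => hiff p ((pvBox_toNatCast s hs p).mp hbox))
  have hTr : pvTrue (pvBfs a s (pvSet3 v c.1 c.2.1 c.2.2) [c] 0).1 =
      (pvDfs a s (PySem.Set.add seen c) [c] 0).1.length := by
    apply pvCount_bridge s.toNat _ _ gA1 gB1
    · intro p hp
      exact (pvBox_toNatCast s hs p).mpr (gB3 p hp)
    · intro p hbox
      exact hsetiff p ((pvBox_toNatCast s hs p).mp hbox)
  have hlenadd : (PySem.Set.add seen c).length = seen.length + 1 := by
    rw [hadd]
    simp
  rw [gA5, gB6, hT1, hTv, hTr, hlenadd]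

def pvStepA (a : List (List (List Bool))) (s : Int)
    (st : List (List (List Bool)) × Int) (c : Int × Int × Int) :
    List (List (List Bool)) × Int :=
  if pvGet3 st.1 c.1 c.2.1 c.2.2 = false ∧ pvGet3 a c.1 c.2.1 c.2.2 = false then
    let v := pvSet3 st.1 c.1 c.2.1 c.2.2
    let r := pvBfs a s v [c] 0
    (r.1, if r.2 > st.2 then r.2 else st.2)
  else st

def pvStepB (a : List (List (List Bool))) (s : Int)
    (st : PySem.Set (Int × Int × Int) × Int) (c : Int × Int × Int) :
    PySem.Set (Int × Int × Int) × Int :=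
  if PySem.Set.contains st.1 c = false ∧ pvGet3 a c.1 c.2.1 c.2.2 = false then
    let seen := PySem.Set.add st.1 c
    let r := pvDfs a s seen [c] 0
    (r.1, max st.2 r.2)
  else st

def pvBoxListI (m : Nat) : List (Int × Int × Int) :=
  (List.range m).flatMap fun (x : Nat) => (List.range m).flatMap fun (y : Nat) =>
    (List.range m).map fun (z : Nat) => ((x : Int), (y : Int), (z : Int))

lemma pvFoldlFlatMap {α β σ : Type} (l : List α) (f : α → List β) (g : σ → β → σ) (init : σ) :
    (l.flatMap f).foldl g init = l.foldl (fun acc x => (f x).foldl g acc) init := by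
  induction l generalizing init with
  | nil => rfl
  | cons x xs ih => simp only [List.flatMap_cons, List.foldl_append, List.foldl_cons, ih]

lemma pvRangeMulMap {α : Type} (a b : Nat) (f : Nat → Nat → α) :
    (List.range (a * b)).map (fun i => f (i / b) (i % b)) =
    (List.range a).flatMap (fun x => (List.range b).map (fun y => f x y)) := by
  induction a with
  | zero => simp
  | succ a ih =>
    rw [Nat.succ_mul, List.range_add, List.map_append, ih, List.range_succ,
      List.flatMap_append, List.flatMap_singleton]
    congr 1
    rw [List.map_map]
    apply List.map_congr_left
    intro j hj
    rw [List.mem_range] at hj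
    simp only [Function.comp_apply]
    have hb : 0 < b := by omega
    have h1 : (a * b + j) / b = a + j / b := by
      rw [Nat.add_comm (a * b) j, Nat.mul_comm a b, Nat.add_mul_div_left j a hb]
      omega
    have h2 : (a * b + j) % b = j := by
      rw [Nat.add_comm (a * b) j, Nat.mul_comm a b, Nat.add_mul_mod_self_left]
      exact Nat.mod_eq_of_lt hj
    rw [h1, h2, Nat.div_eq_of_lt hj, Nat.add_zero]

lemma pvNatDecode (m : Nat) :
    (List.range (m * (m * m))).map
      (fun i => ((↑(i / (m * m)) : Int), (↑(i / m % m) : Int), (↑(i % m) : Int))) =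
    pvBoxListI m := by
  have hfun : (fun i => ((↑(i / (m * m)) : Int), (↑(i / m % m) : Int), (↑(i % m) : Int))) =
      (fun i => ((↑(i / (m * m)) : Int), (↑(i % (m * m) / m) : Int),
        (↑(i % (m * m) % m) : Int))) := by
    funext i
    rw [Nat.mod_mul_right_div_self, Nat.mod_mod_of_dvd _ (Dvd.intro m rfl)]
  rw [hfun]
  rw [pvRangeMulMap m (m * m) (fun x j => ((x : Int), (↑(j / m) : Int), (↑(j % m) : Int)))]
  unfold pvBoxListI
  exact congrArg (fun f => (List.range m).flatMap f) (funext fun x =>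
    pvRangeMulMap m m (fun y z => ((x : Int), (y : Int), (z : Int))))

lemma pvBoxListI_box (m : Nat) (p : Int × Int × Int) (hp : p ∈ pvBoxListI m) :
    pvBox (m : Int) p := by
  unfold pvBoxListI at hp
  rw [List.mem_flatMap] at hp
  obtain ⟨x, hx, hp⟩ := hp
  rw [List.mem_range] at hx
  rw [List.mem_flatMap] at hp
  obtain ⟨y, hy, hp⟩ := hp
  rw [List.mem_range] at hy
  rw [List.mem_map] at hp
  obtain ⟨z, hz, rfl⟩ := hp
  rw [List.mem_range] at hz
  unfold pvBox
  simp only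
  omega

lemma pvBoxListI_mem (m : Nat) (p : Int × Int × Int) (hp : pvBox (m : Int) p) :
    p ∈ pvBoxListI m := by
  obtain ⟨h1, h2, h3, h4, h5, h6⟩ := hp
  unfold pvBoxListI
  rw [List.mem_flatMap]
  refine ⟨p.1.toNat, List.mem_range.mpr (by omega), ?_⟩
  rw [List.mem_flatMap]
  refine ⟨p.2.1.toNat, List.mem_range.mpr (by omega), ?_⟩
  rw [List.mem_map]
  refine ⟨p.2.2.toNat, List.mem_range.mpr (by omega), ?_⟩
  rw [Int.toNat_of_nonneg h1, Int.toNat_of_nonneg h3, Int.toNat_of_nonneg h5]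

lemma pvBoxListI_nodup (m : Nat) : (pvBoxListI m).Nodup := by
  unfold pvBoxListI
  rw [List.nodup_flatMap]
  constructor
  · intro x _
    rw [List.nodup_flatMap]
    constructor
    · intro y _
      refine List.Nodup.map ?_ (List.nodup_range)
      intro a b hab
      simpa using hab
    · refine List.Pairwise.imp ?_ (List.pairwise_lt_range)
      intro y y' hyy
      intro t ht ht'
      rw [List.mem_map] at ht ht'
      obtain ⟨z, _, rfl⟩ := ht
      obtain ⟨z', _, he⟩ := ht'
      rw [Prod.mk.injEq, Prod.mk.injEq] at he
      omega
  · refine List.Pairwise.imp ?_ (List.pairwise_lt_range)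
    intro x x' hxx
    intro t ht ht'
    rw [List.mem_flatMap] at ht ht'
    obtain ⟨y, _, ht⟩ := ht
    obtain ⟨y', _, ht'⟩ := ht'
    rw [List.mem_map] at ht ht'
    obtain ⟨z, _, rfl⟩ := ht
    obtain ⟨z', _, he⟩ := ht'
    rw [Prod.mk.injEq, Prod.mk.injEq] at he
    omega

lemma pvInit_shaped (m : Nat) :
    pvShaped m (List.replicate m (List.replicate m (List.replicate m false))) := by
  refine ⟨List.length_replicate, ?_⟩
  intro p hp
  rw [List.eq_of_mem_replicate hp]
  refine ⟨List.length_replicate, ?_⟩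
  intro r hr
  rw [List.eq_of_mem_replicate hr]
  exact List.length_replicate

lemma pvInit_get (m : Nat) (p : Int × Int × Int) (hp : pvBox (m : Int) p) :
    pvGet3 (List.replicate m (List.replicate m (List.replicate m false)))
      p.1 p.2.1 p.2.2 = false := by
  obtain ⟨h1, h2, h3, h4, h5, h6⟩ := hp
  unfold pvGet3
  rw [if_pos ⟨h1, h3, h5⟩]
  rw [List.getElem?_replicate, if_pos (by omega : p.1.toNat < m)]
  simp only [Option.bind_some]
  rw [List.getElem?_replicate, if_pos (by omega : p.2.1.toNat < m)]
  simp only [Option.bind_some]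
  rw [List.getElem?_replicate, if_pos (by omega : p.2.2.toNat < m)]
  rfl

lemma pvMaxIf (m x y : Int) (h : x = y) : (if x > m then x else m) = max m y := by
  subst h
  rcases lt_or_ge m x with h | h
  · rw [if_pos h, max_eq_right (le_of_lt h)]
  · rw [if_neg (not_lt.mpr h), max_eq_left h]

lemma pvLockstep (a : List (List (List Bool))) (s : Int) (hs : 1 ≤ s) :
    ∀ (cs : List (Int × Int × Int)), (∀ c ∈ cs, pvBox s c) →
    ∀ (v : List (List (List Bool))) (seen : PySem.Set (Int × Int × Int)) (mx : Int),
    pvShaped s.toNat v → seen.Nodup → (∀ p ∈ seen, pvBox s p) →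
    (∀ p, pvBox s p → (pvGet3 v p.1 p.2.1 p.2.2 = true ↔ p ∈ seen)) →
    (cs.foldl (pvStepA a s) (v, mx)).2 = (cs.foldl (pvStepB a s) (seen, mx)).2 := by
  intro cs
  induction cs with
  | nil => intro _ v seen mx _ _ _ _; rfl
  | cons c cs ih =>
    intro hbox v seen mx hsh hnd hboxseen hiff
    have hc : pvBox s c := hbox c List.mem_cons_self
    have hbox' : ∀ c' ∈ cs, pvBox s c' := fun c' hc' => hbox c' (List.mem_cons_of_mem c hc')
    simp only [List.foldl_cons]
    have hcontains : PySem.Set.contains seen c = false ↔ pvGet3 v c.1 c.2.1 c.2.2 = false := by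
      constructor
      · intro h
        rcases Bool.eq_false_or_eq_true (pvGet3 v c.1 c.2.1 c.2.2) with hg | hg
        · rw [(PySem.Set.contains_iff _ _).mpr ((hiff c hc).mp hg)] at h
          exact absurd h (by simp)
        · exact hg
      · intro h
        rcases Bool.eq_false_or_eq_true (PySem.Set.contains seen c) with hg | hg
        · rw [(hiff c hc).mpr ((PySem.Set.contains_iff _ _).mp hg)] at h
          exact absurd h (by simp)
        · exact hg
    by_cases hcond : pvGet3 v c.1 c.2.1 c.2.2 = false ∧ pvGet3 a c.1 c.2.1 c.2.2 = false
    · have hstepA : pvStepA a s (v, mx) c =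
          ((pvBfs a s (pvSet3 v c.1 c.2.1 c.2.2) [c] 0).1,
            if (pvBfs a s (pvSet3 v c.1 c.2.1 c.2.2) [c] 0).2 > mx then
              (pvBfs a s (pvSet3 v c.1 c.2.1 c.2.2) [c] 0).2 else mx) := by
        simp only [pvStepA]
        rw [if_pos hcond]
      have hstepB : pvStepB a s (seen, mx) c =
          ((pvDfs a s (PySem.Set.add seen c) [c] 0).1,
            max mx (pvDfs a s (PySem.Set.add seen c) [c] 0).2) := by
        simp only [pvStepB]
        rw [if_pos ⟨hcontains.mpr hcond.1, hcond.2⟩]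
      rw [hstepA, hstepB]
      obtain ⟨k1, k2, k3, k4, k5⟩ := pvComponent_eq a s hs v seen hsh hnd hboxseen hiff c hc
        hcond.1
      rw [pvMaxIf mx _ _ k5]
      exact ih hbox' _ _ _ k1 k2 k3 k4
    · have hstepA : pvStepA a s (v, mx) c = (v, mx) := by
        simp only [pvStepA]
        rw [if_neg hcond]
      have hstepB : pvStepB a s (seen, mx) c = (seen, mx) := by
        simp only [pvStepB]
        rw [if_neg (by
          intro hcb
          exact hcond ⟨hcontains.mp hcb.1, hcb.2⟩)]
      rw [hstepA, hstepB]
      exact ih hbox' v seen mx hsh hnd hboxseen hiff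

lemma pvLA (a : List (List (List Bool))) (s : Int) :
    largestchunk a s =
      (((PySem.List.pyRange 0 s 1).flatMap fun x =>
        (PySem.List.pyRange 0 s 1).flatMap fun y =>
          (PySem.List.pyRange 0 s 1).map fun z => (x, y, z)).foldl (pvStepA a s)
        (List.replicate s.toNat (List.replicate s.toNat (List.replicate s.toNat false)),
          (0 : Int))).2 := by
  unfold largestchunk
  simp only [pvFoldlFlatMap, List.foldl_map]
  rfl

lemma pvCellListEq (s : Int) :
    ((PySem.List.pyRange 0 s 1).flatMap fun x =>
      (PySem.List.pyRange 0 s 1).flatMap fun y =>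
        (PySem.List.pyRange 0 s 1).map fun z => ((x : Int), (y : Int), (z : Int))) =
    pvBoxListI s.toNat := by
  rw [PySem.List.pyRange_one]
  simp only [sub_zero, zero_add, List.flatMap_map, List.map_map]
  unfold pvBoxListI
  rfl

lemma pvLB (a : List (List (List Bool))) (s : Int) (m : Nat) (hm : s = (m : Int)) :
    pvModel a s = ((pvBoxListI m).foldl (pvStepB a s)
      (([] : PySem.Set (Int × Int × Int)), (0 : Int))).2 := by
  subst hm
  unfold pvModel
  have hpow : ((m : Int) ^ 3) = ((m ^ 3 : Nat) : Int) := by push_cast; ring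
  rw [hpow, PySem.List.pyRange_one]
  simp only [sub_zero, Int.toNat_natCast, zero_add]
  rw [List.foldl_map]
  rw [← pvNatDecode m, List.foldl_map]
  have hm3 : m ^ 3 = m * (m * m) := by ring
  rw [hm3]
  have hfun : (fun (st : PySem.Set (Int × Int × Int) × Int) (k : Nat) =>
      (fun (st : PySem.Set (Int × Int × Int) × Int) (i : Int) =>
        let x := PySem.Int.floordiv i ((m : Int) * (m : Int))
        let y := PySem.Int.mod (PySem.Int.floordiv i (m : Int)) (m : Int)
        let z := PySem.Int.mod i (m : Int)
        if PySem.Set.contains st.1 (x, y, z) = false ∧ pvGet3 a x y z = false then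
          let seen := PySem.Set.add st.1 (x, y, z)
          let r := pvDfs a (m : Int) seen [(x, y, z)] 0
          (r.1, max st.2 r.2)
        else st) st ((k : Nat) : Int)) =
      (fun (st : PySem.Set (Int × Int × Int) × Int) (k : Nat) =>
        pvStepB a (m : Int) st
          ((↑(k / (m * m)) : Int), (↑(k / m % m) : Int), (↑(k % m) : Int))) := by
    funext st k
    have hc1 : ((m : Int) * (m : Int)) = ((m * m : Nat) : Int) := by push_cast; ring
    simp only [hc1, PySem.Int.floordiv_natCast, PySem.Int.mod_natCast, pvStepB]
  rw [hfun]
  rfl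

theorem pvA_eq_model (a : List (List (List Bool))) (s : Int) :
    largestchunk a s = pvModel a s := by
  by_cases hs : 1 ≤ s
  · have hm : s = ((s.toNat : Nat) : Int) := (Int.toNat_of_nonneg (by omega)).symm
    rw [pvLA a s, pvCellListEq s, pvLB a s s.toNat hm]
    apply pvLockstep a s hs (pvBoxListI s.toNat)
    · intro c hc
      have := pvBoxListI_box s.toNat c hc
      rwa [← hm] at this
    · exact pvInit_shaped s.toNat
    · exact List.nodup_nil
    · intro p hp
      exact absurd hp (List.not_mem_nil)
    · intro p hbox
      rw [pvInit_get s.toNat p (by rwa [hm] at hbox)]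
      simp
  · have hr1 : PySem.List.pyRange 0 s 1 = [] := by
      rw [PySem.List.pyRange_one]
      have h0 : (s - 0).toNat = 0 := by omega
      rw [h0]
      rfl
    have hs3 : s ^ 3 ≤ 0 := by nlinarith [sq_nonneg s]
    have hr3 : PySem.List.pyRange 0 (s ^ 3) 1 = [] := by
      rw [PySem.List.pyRange_one]
      have h0 : (s ^ 3 - 0).toNat = 0 := by omega
      rw [h0]
      rfl
    unfold largestchunk pvModel
    rw [hr1, hr3]
    rfl

-- ---- Phase 2: the torus adjacency graph, components and the max-component predicate ----

def pvEmp (a : List (List (List Bool))) (s : Int) (p : Int × Int × Int) : Prop :=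
  pvBox s p ∧ pvGet3 a p.1 p.2.1 p.2.2 = false

def pvStp (a : List (List (List Bool))) (s : Int) (p q : Int × Int × Int) : Prop :=
  pvEmp a s p ∧ pvEmp a s q ∧ ∃ d ∈ pvDirs, q = pvNbr s p d

def pvR (a : List (List (List Bool))) (s : Int) (p q : Int × Int × Int) : Prop :=
  Relation.ReflTransGen (pvStp a s) p q

lemma pvModInv (s x t : Int) (hs : 1 ≤ s) (h0 : 0 ≤ x) (h1 : x < s) :
    PySem.Int.mod (PySem.Int.mod (x + t) s + (-t)) s = x := by
  rw [PySem.Int.mod_eq_emod_of_pos (by omega), PySem.Int.mod_eq_emod_of_pos (by omega)]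
  rw [Int.add_emod, Int.emod_emod_of_dvd _ (dvd_refl s), ← Int.add_emod]
  have h : x + t + -t = x := by ring
  rw [h, Int.emod_eq_of_lt h0 h1]

lemma pvNbr_inv (s : Int) (hs : 1 ≤ s) (p d : Int × Int × Int) (hp : pvBox s p)
    (hd : d ∈ pvDirs) : ∃ d' ∈ pvDirs, pvNbr s (pvNbr s p d) d' = p := by
  obtain ⟨h1, h2, h3, h4, h5, h6⟩ := hp
  refine ⟨(-d.1, -d.2.1, -d.2.2), ?_, ?_⟩
  · fin_cases hd <;> simp [pvDirs]
  · show (PySem.Int.mod (PySem.Int.mod (p.1 + d.1) s + -d.1) s,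
      PySem.Int.mod (PySem.Int.mod (p.2.1 + d.2.1) s + -d.2.1) s,
      PySem.Int.mod (PySem.Int.mod (p.2.2 + d.2.2) s + -d.2.2) s) = p
    rw [pvModInv s p.1 d.1 hs h1 h2, pvModInv s p.2.1 d.2.1 hs h3 h4,
      pvModInv s p.2.2 d.2.2 hs h5 h6]

lemma pvStp_symm (a : List (List (List Bool))) (s : Int) (hs : 1 ≤ s)
    (p q : Int × Int × Int) (h : pvStp a s p q) : pvStp a s q p := by
  obtain ⟨hep, heq, d, hd, rfl⟩ := h
  obtain ⟨d', hd', he'⟩ := pvNbr_inv s hs p d hep.1 hd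
  exact ⟨heq, hep, d', hd', he'.symm⟩

lemma pvR_symm (a : List (List (List Bool))) (s : Int) (hs : 1 ≤ s)
    (p q : Int × Int × Int) (h : pvR a s p q) : pvR a s q p :=
  Relation.ReflTransGen.symmetric (fun _ _ hxy => pvStp_symm a s hs _ _ hxy) h

lemma pvR_emp (a : List (List (List Bool))) (s : Int) (p q : Int × Int × Int)
    (hp : pvEmp a s p) (h : pvR a s p q) : pvEmp a s q := by
  induction h with
  | refl => exact hp
  | tail _ hst _ => exact hst.2.1

lemma pvR_class (a : List (List (List Bool))) (s : Int) (hs : 1 ≤ s)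
    (c c' : Int × Int × Int) (h : pvR a s c c') (p : Int × Int × Int) :
    pvR a s c p ↔ pvR a s c' p :=
  ⟨fun hp => Relation.ReflTransGen.trans (pvR_symm a s hs c c' h) hp,
   fun hp => Relation.ReflTransGen.trans h hp⟩

def pvIsClass (a : List (List (List Bool))) (s : Int) (c : Int × Int × Int)
    (l : List (Int × Int × Int)) : Prop :=
  l.Nodup ∧ ∀ p, p ∈ l ↔ pvR a s c p

lemma pvClass_len_eq (a : List (List (List Bool))) (s : Int) (hs : 1 ≤ s)
    (c c' : Int × Int × Int) (l l' : List (Int × Int × Int)) (hcc : pvR a s c c')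
    (h : pvIsClass a s c l) (h' : pvIsClass a s c' l') : l.length = l'.length := by
  refine List.Perm.length_eq ?_
  rw [List.perm_ext_iff_of_nodup h.1 h'.1]
  intro p
  rw [h.2 p, h'.2 p]
  exact pvR_class a s hs c c' hcc p

-- m is the size of the largest connected component of empty cells (0 if none)
def pvIsMax (a : List (List (List Bool))) (s : Int) (m : Int) : Prop :=
  0 ≤ m ∧
  (∀ c l, pvEmp a s c → pvIsClass a s c l → (l.length : Int) ≤ m) ∧
  (m = 0 ∨ ∃ c l, pvEmp a s c ∧ pvIsClass a s c l ∧ m = (l.length : Int))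

lemma pvIsMax_unique (a : List (List (List Bool))) (s : Int) (m m' : Int)
    (h : pvIsMax a s m) (h' : pvIsMax a s m') : m = m' := by
  obtain ⟨h0, hub, hat⟩ := h
  obtain ⟨h0', hub', hat'⟩ := h'
  have hle : m ≤ m' := by
    rcases hat with rfl | ⟨c, l, hc, hcl, rfl⟩
    · exact h0'
    · exact hub' c l hc hcl
  have hle' : m' ≤ m := by
    rcases hat' with rfl | ⟨c, l, hc, hcl, rfl⟩
    · exact h0
    · exact hub c l hc hcl
  omega

-- ---- Phase 3: the model computes the largest component size ----

lemma pvModel_comp (a : List (List (List Bool))) (s : Int) (hs : 1 ≤ s)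
    (seen : PySem.Set (Int × Int × Int)) (c : Int × Int × Int)
    (hnd : seen.Nodup) (hemps : ∀ p ∈ seen, pvEmp a s p)
    (hclo : ∀ p ∈ seen, ∀ q, pvR a s p q → q ∈ seen)
    (hc : pvEmp a s c) (hcn : c ∉ seen) :
    (pvDfs a s (PySem.Set.add seen c) [c] 0).1.Nodup ∧
    (∀ p, p ∈ (pvDfs a s (PySem.Set.add seen c) [c] 0).1 ↔ p ∈ seen ∨ pvR a s c p) ∧
    (pvDfs a s (PySem.Set.add seen c) [c] 0).2 =
      ((pvDfs a s (PySem.Set.add seen c) [c] 0).1.length : Int) - seen.length := by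
  have hadd : PySem.Set.add seen c = seen ++ [c] := PySem.Set.add_of_not_mem hcn
  have hRnotseen : ∀ p, pvR a s c p → p ∉ seen := by
    intro p hR hmem
    exact hcn (hclo p hmem c (pvR_symm a s hs c p hR))
  obtain ⟨g1, g2, g3, g4, g5, g6, g7⟩ :=
    pvDfs_main a s hs (fun p => p ∈ seen) (PySem.Set.add seen c) [c] 0
      (by rw [hadd, List.nodup_append]
          refine ⟨hnd, List.nodup_singleton _, ?_⟩
          intro t ht b hb
          rw [List.mem_singleton] at hb
          subst hb
          intro he
          exact hcn (he ▸ ht))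
      (by
        intro p hp
        rw [hadd] at hp
        rcases List.mem_append.mp hp with hp | hp
        · exact (hemps p hp).1
        · rw [List.mem_singleton] at hp
          subst hp
          exact hc.1)
      (by
        intro p hp
        rw [List.mem_singleton] at hp
        subst hp
        exact ⟨hc.1, by rw [hadd]; exact List.mem_append_right _ List.mem_cons_self, hcn⟩)
      (fun p _ hbp => by rw [hadd]; exact List.mem_append_left _ hbp)
      (by
        intro p hbox hmem hbp hnq d hd hga
        exfalso
        rw [hadd] at hmem
        rcases List.mem_append.mp hmem with hp | hp
        · exact hbp hp
        · rw [List.mem_singleton] at hp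
          subst hp
          exact hnq List.mem_cons_self)
  have hback : ∀ p, pvR a s c p → p ∈ (pvDfs a s (PySem.Set.add seen c) [c] 0).1 := by
    intro p hR
    induction hR with
    | refl =>
      apply g2
      rw [hadd]
      exact List.mem_append_right _ List.mem_cons_self
    | @tail x q hxc hst ih =>
      obtain ⟨hex, heq, d, hd, rfl⟩ := hst
      exact g4 x hex.1 ih (hRnotseen x hxc) d hd heq.2
  refine ⟨g1, ?_, ?_⟩
  · intro p
    constructor
    · intro hp
      refine g5 (fun p => p ∈ seen ∨ pvR a s c p) ?_ ?_ p hp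
      · intro p' hp'
        rw [hadd] at hp'
        rcases List.mem_append.mp hp' with hp' | hp'
        · exact Or.inl hp'
        · rw [List.mem_singleton] at hp'
          subst hp'
          exact Or.inr Relation.ReflTransGen.refl
      · intro p' hbox' hU hbp d hd hga
        rcases hU with hU | hU
        · exact absurd hU hbp
        · refine Or.inr (Relation.ReflTransGen.tail hU ?_)
          exact ⟨pvR_emp a s c p' hc hU, ⟨pvNbr_box s p' d hs, hga⟩, d, hd, rfl⟩
    · intro hp
      rcases hp with hp | hp
      · apply g2
        rw [hadd]
        exact List.mem_append_left _ hp
      · exact hback p hp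
  · have hlenadd : (PySem.Set.add seen c).length = seen.length + 1 := by
      rw [hadd]; simp
    rw [g6, hlenadd, List.length_singleton]
    push_cast
    omega

def pvInvM (a : List (List (List Bool))) (s : Int) (P : List (Int × Int × Int))
    (st : PySem.Set (Int × Int × Int) × Int) : Prop :=
  st.1.Nodup ∧ (∀ p ∈ st.1, pvEmp a s p) ∧
  (∀ p, p ∈ st.1 ↔ ∃ c ∈ P, pvEmp a s c ∧ pvR a s c p) ∧
  0 ≤ st.2 ∧
  (∀ c ∈ P, ∀ l, pvEmp a s c → pvIsClass a s c l → (l.length : Int) ≤ st.2) ∧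
  (st.2 = 0 ∨ ∃ c ∈ P, ∃ l, pvEmp a s c ∧ pvIsClass a s c l ∧ st.2 = (l.length : Int))

lemma pvInvM_step (a : List (List (List Bool))) (s : Int) (hs : 1 ≤ s)
    (P : List (Int × Int × Int)) (st : PySem.Set (Int × Int × Int) × Int)
    (c : Int × Int × Int) (hcbox : pvBox s c) (h : pvInvM a s P st) :
    pvInvM a s (P ++ [c]) (pvStepB a s st c) := by
  obtain ⟨h1, h2, h3, h4, h5, h6⟩ := h
  have hmemPc : ∀ c' : Int × Int × Int, c' ∈ P ++ [c] ↔ c' ∈ P ∨ c' = c := by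
    intro c'
    rw [List.mem_append, List.mem_singleton]
  have hclo : ∀ p ∈ st.1, ∀ q, pvR a s p q → q ∈ st.1 := by
    intro p hp q hq
    obtain ⟨c0, hc0, he0, hr0⟩ := (h3 p).mp hp
    exact (h3 q).mpr ⟨c0, hc0, he0, Relation.ReflTransGen.trans hr0 hq⟩
  by_cases hcond : PySem.Set.contains st.1 c = false ∧ pvGet3 a c.1 c.2.1 c.2.2 = false
  · have hcn : c ∉ st.1 := by
      intro hm
      rw [(PySem.Set.contains_iff _ _).mpr hm] at hcond
      exact absurd hcond.1 (by simp)
    have hcEmp : pvEmp a s c := ⟨hcbox, hcond.2⟩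
    have hstep : pvStepB a s st c =
        ((pvDfs a s (PySem.Set.add st.1 c) [c] 0).1,
          max st.2 (pvDfs a s (PySem.Set.add st.1 c) [c] 0).2) := by
      simp only [pvStepB]
      rw [if_pos hcond]
    obtain ⟨g1, giff, gcnt⟩ := pvModel_comp a s hs st.1 c h1 h2 hclo hcEmp hcn
    have hRnot : ∀ p, pvR a s c p → p ∉ st.1 := by
      intro p hR hmem
      exact hcn (hclo p hmem c (pvR_symm a s hs c p hR))
    set r := pvDfs a s (PySem.Set.add st.1 c) [c] 0 with hr
    have hlmem : ∀ p, p ∈ r.1.filter (fun p => !(decide (p ∈ st.1))) ↔ pvR a s c p := by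
      intro p
      rw [List.mem_filter]
      constructor
      · rintro ⟨hpr, hpd⟩
        rcases (giff p).mp hpr with hp | hp
        · simp [hp] at hpd
        · exact hp
      · intro hp
        refine ⟨(giff p).mpr (Or.inr hp), ?_⟩
        simp [hRnot p hp]
    have hclass : pvIsClass a s c (r.1.filter (fun p => !(decide (p ∈ st.1)))) :=
      ⟨g1.filter _, hlmem⟩
    have hlen : ((r.1.filter (fun p => !(decide (p ∈ st.1)))).length : Int) = r.2 := by
      have hperm : (r.1.filter (fun p => decide (p ∈ st.1))).Perm st.1 := by
        rw [List.perm_ext_iff_of_nodup (g1.filter _) h1]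
        intro p
        rw [List.mem_filter]
        constructor
        · rintro ⟨-, hpd⟩
          exact of_decide_eq_true hpd
        · intro hp
          exact ⟨(giff p).mpr (Or.inl hp), decide_eq_true hp⟩
      have hsplit := (List.filter_append_perm (fun p => decide (p ∈ st.1)) r.1).length_eq
      rw [List.length_append] at hsplit
      have hp1 := hperm.length_eq
      rw [gcnt]
      omega
    rw [hstep]
    refine ⟨g1, ?_, ?_, ?_, ?_, ?_⟩
    · intro p hp
      rcases (giff p).mp hp with hp | hp
      · exact h2 p hp
      · exact pvR_emp a s c p hcEmp hp
    · intro p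
      rw [giff p]
      constructor
      · rintro (hp | hp)
        · obtain ⟨c0, hc0, he0, hr0⟩ := (h3 p).mp hp
          exact ⟨c0, (hmemPc c0).mpr (Or.inl hc0), he0, hr0⟩
        · exact ⟨c, (hmemPc c).mpr (Or.inr rfl), hcEmp, hp⟩
      · rintro ⟨c0, hc0, he0, hr0⟩
        rcases (hmemPc c0).mp hc0 with hc0 | rfl
        · exact Or.inl ((h3 p).mpr ⟨c0, hc0, he0, hr0⟩)
        · exact Or.inr hr0
    · exact le_trans h4 (le_max_left _ _)
    · intro c0 hc0 l he0 hcl0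
      rcases (hmemPc c0).mp hc0 with hc0 | rfl
      · exact le_trans (h5 c0 hc0 l he0 hcl0) (le_max_left _ _)
      · have := pvClass_len_eq a s hs c0 c0 l
          (r.1.filter (fun p => !(decide (p ∈ st.1)))) Relation.ReflTransGen.refl hcl0 hclass
        rw [this, hlen]
        exact le_max_right _ _
    · rcases le_total st.2 r.2 with hle | hle
      · refine Or.inr ⟨c, (hmemPc c).mpr (Or.inr rfl), _, hcEmp, hclass, ?_⟩
        rw [max_eq_right hle, hlen]
      · rw [max_eq_left hle]
        rcases h6 with h6 | ⟨c0, hc0, l, he0, hcl0, hv⟩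
        · exact Or.inl h6
        · exact Or.inr ⟨c0, (hmemPc c0).mpr (Or.inl hc0), l, he0, hcl0, hv⟩
  · have hstep : pvStepB a s st c = st := by
      simp only [pvStepB]
      rw [if_neg hcond]
    rw [hstep]
    have hskipmem : ∀ {q : Int × Int × Int}, pvEmp a s q → q = c → c ∈ st.1 := by
      intro q he hq
      subst hq
      have hcf : PySem.Set.contains st.1 q ≠ false := fun hf => hcond ⟨hf, he.2⟩
      rcases Bool.eq_false_or_eq_true (PySem.Set.contains st.1 q) with hb | hb
      · exact (PySem.Set.contains_iff _ _).mp hb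
      · exact absurd hb hcf
    refine ⟨h1, h2, ?_, h4, ?_, ?_⟩
    · intro p
      rw [h3 p]
      constructor
      · rintro ⟨c0, hc0, he0, hr0⟩
        exact ⟨c0, (hmemPc c0).mpr (Or.inl hc0), he0, hr0⟩
      · rintro ⟨c0, hc0, he0, hr0⟩
        rcases (hmemPc c0).mp hc0 with hc0 | rfl
        · exact ⟨c0, hc0, he0, hr0⟩
        · exact (h3 p).mp (hclo c0 (hskipmem he0 rfl) p hr0)
    · intro c0 hc0 l he0 hcl0
      rcases (hmemPc c0).mp hc0 with hc0 | rfl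
      · exact h5 c0 hc0 l he0 hcl0
      · have hcm : c0 ∈ st.1 := hskipmem he0 rfl
        obtain ⟨c1, hc1, he1, hr1⟩ := (h3 c0).mp hcm
        have hcl1 : pvIsClass a s c1 l := by
          refine ⟨hcl0.1, fun p => ?_⟩
          rw [hcl0.2 p]
          exact (pvR_class a s hs c1 c0 hr1 p).symm
        exact h5 c1 hc1 l he1 hcl1
    · rcases h6 with h6 | ⟨c0, hc0, l, he0, hcl0, hv⟩
      · exact Or.inl h6
      · exact Or.inr ⟨c0, (hmemPc c0).mpr (Or.inl hc0), l, he0, hcl0, hv⟩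

lemma pvInvM_fold (a : List (List (List Bool))) (s : Int) (hs : 1 ≤ s) :
    ∀ (l P : List (Int × Int × Int)) (st : PySem.Set (Int × Int × Int) × Int),
      (∀ c ∈ l, pvBox s c) → pvInvM a s P st →
      pvInvM a s (P ++ l) (l.foldl (pvStepB a s) st) := by
  intro l
  induction l with
  | nil => intro P st _ h; simpa using h
  | cons c l ih =>
    intro P st hbox h
    simp only [List.foldl_cons]
    have h1 := pvInvM_step a s hs P st c (hbox c List.mem_cons_self) h
    have h2 := ih (P ++ [c]) (pvStepB a s st c)
      (fun c' hc' => hbox c' (List.mem_cons_of_mem c hc')) h1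
    rwa [List.append_assoc, List.singleton_append] at h2

lemma pvModel_isMax (a : List (List (List Bool))) (s : Int) (hs : 1 ≤ s) :
    pvIsMax a s (pvModel a s) := by
  have hm : s = ((s.toNat : Nat) : Int) := (Int.toNat_of_nonneg (by omega)).symm
  rw [pvLB a s s.toNat hm]
  have hinit : pvInvM a s [] (([] : PySem.Set (Int × Int × Int)), (0 : Int)) := by
    refine ⟨List.nodup_nil, by simp, ?_, le_refl 0, by simp, Or.inl rfl⟩
    intro p
    simp
  have hinv := pvInvM_fold a s hs (pvBoxListI s.toNat) []
    (([] : PySem.Set (Int × Int × Int)), (0 : Int))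
    (fun c hc => by
      have := pvBoxListI_box s.toNat c hc
      rwa [← hm] at this) hinit
  rw [List.nil_append] at hinv
  obtain ⟨i1, i2, i3, i4, i5, i6⟩ := hinv
  refine ⟨i4, ?_, ?_⟩
  · intro c l hc hcl
    have hcP : c ∈ pvBoxListI s.toNat := pvBoxListI_mem s.toNat c (by
      have hb := hc.1
      rwa [hm] at hb)
    exact i5 c hcP l hc hcl
  · rcases i6 with h | ⟨c, _, l, hc, hcl, hv⟩
    · exact Or.inl h
    · exact Or.inr ⟨c, l, hc, hcl, hv⟩

-- ---- Phase 4: the blob-merging scan computes the largest component size ----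

def pvStpIn (a : List (List (List Bool))) (s : Int) (P : List (Int × Int × Int))
    (p q : Int × Int × Int) : Prop :=
  pvStp a s p q ∧ p ∈ P ∧ q ∈ P

def pvRP (a : List (List (List Bool))) (s : Int) (P : List (Int × Int × Int))
    (p q : Int × Int × Int) : Prop :=
  Relation.ReflTransGen (pvStpIn a s P) p q

lemma pvRP_mono (a : List (List (List Bool))) (s : Int) (P P' : List (Int × Int × Int))
    (hsub : ∀ x ∈ P, x ∈ P') (p q : Int × Int × Int) (h : pvRP a s P p q) :
    pvRP a s P' p q :=
  Relation.ReflTransGen.mono (fun x y hxy => ⟨hxy.1, hsub x hxy.2.1, hsub y hxy.2.2⟩) h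

lemma pvRP_le_pvR (a : List (List (List Bool))) (s : Int) (P : List (Int × Int × Int))
    (p q : Int × Int × Int) (h : pvRP a s P p q) : pvR a s p q :=
  Relation.ReflTransGen.mono (fun _ _ hxy => hxy.1) h

lemma pvRP_symm (a : List (List (List Bool))) (s : Int) (hs : 1 ≤ s)
    (P : List (Int × Int × Int)) (p q : Int × Int × Int) (h : pvRP a s P p q) :
    pvRP a s P q p :=
  Relation.ReflTransGen.symmetric
    (fun x y hxy => ⟨pvStp_symm a s hs x y hxy.1, hxy.2.2, hxy.2.1⟩) h

def pvInvB (a : List (List (List Bool))) (s : Int) (P : List (Int × Int × Int))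
    (comps : List (List (Int × Int × Int))) : Prop :=
  (∀ K ∈ comps, K ≠ [] ∧ ∀ p ∈ K, pvEmp a s p ∧ p ∈ P) ∧
  comps.flatten.Nodup ∧
  (∀ p, pvEmp a s p → p ∈ P → ∃ K ∈ comps, p ∈ K) ∧
  (∀ K ∈ comps, ∀ p ∈ K, ∀ q ∈ K, pvRP a s P p q) ∧
  (∀ K ∈ comps, ∀ p ∈ K, ∀ q, pvStp a s p q → q ∈ P → q ∈ K)

lemma pvInvB_step (a : List (List (List Bool))) (s : Int) (hs : 1 ≤ s)
    (P : List (Int × Int × Int)) (comps : List (List (Int × Int × Int)))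
    (c : Int × Int × Int) (hcbox : pvBox s c) (hcP : c ∉ P) (h : pvInvB a s P comps) :
    pvInvB a s (P ++ [c]) (pvMergeStep a s comps c) := by
  obtain ⟨h1, h2, h3, h4, h5⟩ := h
  have hsub : ∀ x ∈ P, x ∈ P ++ [c] := fun x hx => List.mem_append_left _ hx
  have hcP' : c ∈ P ++ [c] := List.mem_append_right _ List.mem_cons_self
  have hmemP' : ∀ q : Int × Int × Int, q ∈ P ++ [c] ↔ q ∈ P ∨ q = c := by
    intro q
    rw [List.mem_append, List.mem_singleton]
  by_cases haf : pvGet3 a c.1 c.2.1 c.2.2 = false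
  · have hcEmp : pvEmp a s c := ⟨hcbox, haf⟩
    have hstep : pvMergeStep a s comps c =
        (comps.filter fun K => !(K.any fun q => (pvDirs.map (pvNbr s c)).contains q)) ++
          [c :: (comps.filter fun K => K.any fun q => (pvDirs.map (pvNbr s c)).contains q).flatten] := by
      simp only [pvMergeStep]
      rw [if_pos haf]
    rw [hstep]
    set tch := fun K : List (Int × Int × Int) =>
      K.any fun q => (pvDirs.map (pvNbr s c)).contains q with htchdef
    have htouch : ∀ K : List (Int × Int × Int),
        tch K = true ↔ ∃ q ∈ K, ∃ d ∈ pvDirs, q = pvNbr s c d := by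
      intro K
      rw [htchdef]
      simp only [List.any_eq_true, List.contains_iff_mem, List.mem_map]
      constructor
      · rintro ⟨q, hq, d, hd, he⟩
        exact ⟨q, hq, d, hd, he.symm⟩
      · rintro ⟨q, hq, d, hd, he⟩
        exact ⟨q, hq, d, hd, he.symm⟩
    have hmerged : ∀ p, p ∈ c :: (comps.filter tch).flatten ↔
        p = c ∨ ∃ K ∈ comps, tch K = true ∧ p ∈ K := by
      intro p
      rw [List.mem_cons, List.mem_flatten]
      constructor
      · rintro (rfl | ⟨K, hK, hpK⟩)
        · exact Or.inl rfl
        · rw [List.mem_filter] at hK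
          exact Or.inr ⟨K, hK.1, hK.2, hpK⟩
      · rintro (rfl | ⟨K, hK, ht, hpK⟩)
        · exact Or.inl rfl
        · exact Or.inr ⟨K, List.mem_filter.mpr ⟨hK, ht⟩, hpK⟩
    have hmemnew : ∀ K, K ∈ (comps.filter fun K => !(tch K)) ++
        [c :: (comps.filter tch).flatten] ↔
        (K ∈ comps ∧ tch K = false) ∨ K = c :: (comps.filter tch).flatten := by
      intro K
      rw [List.mem_append, List.mem_singleton, List.mem_filter, Bool.not_eq_true']
    have hcnm : c ∉ comps.flatten := by
      intro hm
      rw [List.mem_flatten] at hm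
      obtain ⟨K, hK, hcK⟩ := hm
      exact hcP ((h1 K hK).2 c hcK).2
    have hconn : ∀ p ∈ c :: (comps.filter tch).flatten, pvRP a s (P ++ [c]) c p := by
      intro p hp
      rcases (hmerged p).mp hp with rfl | ⟨K, hK, ht, hpK⟩
      · exact Relation.ReflTransGen.refl
      · obtain ⟨q0, hq0K, d, hd, he⟩ := (htouch K).mp ht
        have hq0E : pvEmp a s q0 := ((h1 K hK).2 q0 hq0K).1
        have hstep0 : pvStpIn a s (P ++ [c]) c q0 :=
          ⟨⟨hcEmp, hq0E, d, hd, he⟩, hcP', hsub q0 ((h1 K hK).2 q0 hq0K).2⟩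
        exact Relation.ReflTransGen.trans (Relation.ReflTransGen.single hstep0)
          (pvRP_mono a s P (P ++ [c]) hsub q0 p (h4 K hK q0 hq0K p hpK))
    refine ⟨?_, ?_, ?_, ?_, ?_⟩
    · intro K hK
      rcases (hmemnew K).mp hK with ⟨hKc, -⟩ | rfl
      · exact ⟨(h1 K hKc).1, fun p hp =>
          ⟨((h1 K hKc).2 p hp).1, hsub p ((h1 K hKc).2 p hp).2⟩⟩
      · refine ⟨List.cons_ne_nil _ _, ?_⟩
        intro p hp
        rcases (hmerged p).mp hp with rfl | ⟨K', hK', -, hpK'⟩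
        · exact ⟨hcEmp, hcP'⟩
        · exact ⟨((h1 K' hK').2 p hpK').1, hsub p ((h1 K' hK').2 p hpK').2⟩
    · have hflat : ((comps.filter fun K => !(tch K)) ++
          [c :: (comps.filter tch).flatten]).flatten =
          (comps.filter fun K => !(tch K)).flatten ++ (c :: (comps.filter tch).flatten) := by
        rw [List.flatten_append]
        simp
      rw [hflat]
      have hperm1 : ((comps.filter fun K => !(tch K)).flatten ++
          (c :: (comps.filter tch).flatten)).Perm
          (c :: ((comps.filter fun K => !(tch K)).flatten ++ (comps.filter tch).flatten)) :=
        List.perm_middle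
      have hperm2 : ((comps.filter fun K => !(tch K)).flatten ++
          (comps.filter tch).flatten).Perm comps.flatten := by
        rw [← List.flatten_append]
        refine List.Perm.flatten ?_
        refine List.Perm.trans (List.perm_append_comm) ?_
        exact List.filter_append_perm tch comps
      have := List.Perm.trans hperm1 (List.Perm.cons c hperm2)
      rw [this.nodup_iff]
      exact List.nodup_cons.mpr ⟨hcnm, h2⟩
    · intro p he hp
      rcases (hmemP' p).mp hp with hp | rfl
      · obtain ⟨K, hK, hpK⟩ := h3 p he hp
        by_cases ht : tch K = true
        · exact ⟨c :: (comps.filter tch).flatten, (hmemnew _).mpr (Or.inr rfl),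
            (hmerged p).mpr (Or.inr ⟨K, hK, ht, hpK⟩)⟩
        · exact ⟨K, (hmemnew K).mpr (Or.inl ⟨hK, Bool.eq_false_iff.mpr ht⟩), hpK⟩
      · exact ⟨p :: (comps.filter tch).flatten, (hmemnew _).mpr (Or.inr rfl),
          (hmerged p).mpr (Or.inl rfl)⟩
    · intro K hK p hp q hq
      rcases (hmemnew K).mp hK with ⟨hKc, -⟩ | rfl
      · exact pvRP_mono a s P (P ++ [c]) hsub p q (h4 K hKc p hp q hq)
      · exact Relation.ReflTransGen.trans
          (pvRP_symm a s hs (P ++ [c]) c p (hconn p hp)) (hconn q hq)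
    · intro K hK p hp q hst hqP
      rcases (hmemnew K).mp hK with ⟨hKc, hnt⟩ | rfl
      · rcases (hmemP' q).mp hqP with hqP | rfl
        · exact h5 K hKc p hp q hst hqP
        · exfalso
          have hst' := pvStp_symm a s hs p q hst
          obtain ⟨-, -, d, hd, he⟩ := hst'
          have : tch K = true := (htouch K).mpr ⟨p, hp, d, hd, he⟩
          rw [this] at hnt
          exact absurd hnt (by simp)
      · rcases (hmemP' q).mp hqP with hqP | rfl
        · have hqE : pvEmp a s q := hst.2.1
          obtain ⟨K0, hK0, hqK0⟩ := h3 q hqE hqP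
          rcases (hmerged p).mp hp with rfl | ⟨K', hK', ht', hpK'⟩
          · obtain ⟨-, -, d, hd, he⟩ := hst
            have ht0 : tch K0 = true := (htouch K0).mpr ⟨q, hqK0, d, hd, he⟩
            exact (hmerged q).mpr (Or.inr ⟨K0, hK0, ht0, hqK0⟩)
          · exact (hmerged q).mpr (Or.inr ⟨K', hK', ht', h5 K' hK' p hpK' q hst hqP⟩)
        · exact (hmerged q).mpr (Or.inl rfl)
  · have hstep : pvMergeStep a s comps c = comps := by
      simp only [pvMergeStep]
      rw [if_neg haf]
    rw [hstep]
    refine ⟨?_, h2, ?_, ?_, ?_⟩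
    · intro K hK
      exact ⟨(h1 K hK).1, fun p hp => ⟨((h1 K hK).2 p hp).1, hsub p ((h1 K hK).2 p hp).2⟩⟩
    · intro p he hp
      rcases (hmemP' p).mp hp with hp | rfl
      · exact h3 p he hp
      · exact absurd he.2 haf
    · intro K hK p hp q hq
      exact pvRP_mono a s P (P ++ [c]) hsub p q (h4 K hK p hp q hq)
    · intro K hK p hp q hst hqP
      rcases (hmemP' q).mp hqP with hqP | rfl
      · exact h5 K hK p hp q hst hqP
      · exact absurd hst.2.1.2 haf

lemma pvInvB_fold (a : List (List (List Bool))) (s : Int) (hs : 1 ≤ s) :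
    ∀ (l P : List (Int × Int × Int)) (comps : List (List (Int × Int × Int))),
      (∀ c ∈ l, pvBox s c) → l.Nodup → (∀ c ∈ l, c ∉ P) → pvInvB a s P comps →
      pvInvB a s (P ++ l) (l.foldl (pvMergeStep a s) comps) := by
  intro l
  induction l with
  | nil => intro P comps _ _ _ h; simpa using h
  | cons c l ih =>
    intro P comps hbox hnd hnp h
    simp only [List.foldl_cons]
    have h1 := pvInvB_step a s hs P comps c (hbox c List.mem_cons_self)
      (hnp c List.mem_cons_self) h
    have h2 := ih (P ++ [c]) (pvMergeStep a s comps c)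
      (fun c' hc' => hbox c' (List.mem_cons_of_mem c hc'))
      (List.nodup_cons.mp hnd).2
      (by
        intro c' hc' hm
        rw [List.mem_append, List.mem_singleton] at hm
        rcases hm with hm | rfl
        · exact hnp c' (List.mem_cons_of_mem c hc') hm
        · exact (List.nodup_cons.mp hnd).1 hc') h1
    rwa [List.append_assoc, List.singleton_append] at h2

lemma pvLAlt (a : List (List (List Bool))) (s : Int) :
    largestchunk_alt a s =
      (((PySem.List.pyRange 0 s 1).flatMap fun x =>
        (PySem.List.pyRange 0 s 1).flatMap fun y =>
          (PySem.List.pyRange 0 s 1).map fun z => (x, y, z)).foldl (pvMergeStep a s)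
        []).foldl (fun best K => if (K.length : Int) > best then (K.length : Int) else best)
        0 := by
  unfold largestchunk_alt
  simp only [pvFoldlFlatMap, List.foldl_map]

lemma pvFoldMax_facts (comps : List (List (Int × Int × Int))) : ∀ b : Int,
    b ≤ comps.foldl (fun best K => if (K.length : Int) > best then (K.length : Int) else best) b ∧
    (∀ K ∈ comps, (K.length : Int) ≤
      comps.foldl (fun best K => if (K.length : Int) > best then (K.length : Int) else best) b) ∧
    (comps.foldl (fun best K => if (K.length : Int) > best then (K.length : Int) else best) b = b ∨
      ∃ K ∈ comps,
        comps.foldl (fun best K => if (K.length : Int) > best then (K.length : Int) else best) b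
          = (K.length : Int)) := by
  induction comps with
  | nil => intro b; exact ⟨le_refl b, by simp, Or.inl rfl⟩
  | cons K l ih =>
    intro b
    simp only [List.foldl_cons]
    set b' := if (K.length : Int) > b then (K.length : Int) else b with hb'
    obtain ⟨i1, i2, i3⟩ := ih b'
    have hbb' : b ≤ b' := by
      rw [hb']
      split
      · omega
      · exact le_refl b
    have hKb' : (K.length : Int) ≤ b' := by
      rw [hb']
      split
      · exact le_refl _
      · omega
    refine ⟨le_trans hbb' i1, ?_, ?_⟩
    · intro K' hK'
      rcases List.mem_cons.mp hK' with rfl | hK'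
      · exact le_trans hKb' i1
      · exact i2 K' hK'
    · rcases i3 with h | ⟨K', hK', he⟩
      · rw [h, hb']
        split
        · exact Or.inr ⟨K, List.mem_cons_self, rfl⟩
        · exact Or.inl rfl
      · exact Or.inr ⟨K', List.mem_cons_of_mem K hK', he⟩

lemma pvBlock_class (a : List (List (List Bool))) (s : Int) (hs : 1 ≤ s)
    (comps : List (List (Int × Int × Int)))
    (hinv : pvInvB a s (pvBoxListI s.toNat) comps)
    (K : List (Int × Int × Int)) (hK : K ∈ comps) (c : Int × Int × Int) (hcK : c ∈ K) :
    pvIsClass a s c K := by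
  obtain ⟨h1, h2, h3, h4, h5⟩ := hinv
  have hm : s = ((s.toNat : Nat) : Int) := (Int.toNat_of_nonneg (by omega)).symm
  have hKnd : K.Nodup := h2.sublist (List.sublist_flatten_of_mem hK)
  refine ⟨hKnd, ?_⟩
  intro p
  constructor
  · intro hp
    exact pvRP_le_pvR a s (pvBoxListI s.toNat) c p (h4 K hK c hcK p hp)
  · intro hp
    induction hp with
    | refl => exact hcK
    | @tail x q hcx hst ih =>
      have hqP : q ∈ pvBoxListI s.toNat := by
        apply pvBoxListI_mem
        have hb := hst.2.1.1
        rwa [hm] at hb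
      exact h5 K hK x ih q hst hqP

lemma pvAlt_isMax (a : List (List (List Bool))) (s : Int) (hs : 1 ≤ s) :
    pvIsMax a s (largestchunk_alt a s) := by
  have hm : s = ((s.toNat : Nat) : Int) := (Int.toNat_of_nonneg (by omega)).symm
  rw [pvLAlt a s, pvCellListEq s]
  have hinit : pvInvB a s [] [] := by
    refine ⟨by simp, by simp, ?_, by simp, by simp⟩
    intro p _ hp
    exact absurd hp (List.not_mem_nil)
  have hinv := pvInvB_fold a s hs (pvBoxListI s.toNat) [] []
    (fun c hc => by
      have := pvBoxListI_box s.toNat c hc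
      rwa [← hm] at this)
    (pvBoxListI_nodup s.toNat)
    (fun c _ hc => absurd hc (List.not_mem_nil)) hinit
  rw [List.nil_append] at hinv
  set comps := (pvBoxListI s.toNat).foldl (pvMergeStep a s) [] with hcomps
  obtain ⟨f1, f2, f3⟩ := pvFoldMax_facts comps 0
  refine ⟨f1, ?_, ?_⟩
  · intro c l hc hcl
    have hcP : c ∈ pvBoxListI s.toNat := pvBoxListI_mem s.toNat c (by
      have hb := hc.1
      rwa [hm] at hb)
    obtain ⟨K, hK, hcK⟩ := hinv.2.2.1 c hc hcP
    have hclK := pvBlock_class a s hs comps hinv K hK c hcK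
    have := pvClass_len_eq a s hs c c l K Relation.ReflTransGen.refl hcl hclK
    rw [this]
    exact f2 K hK
  · rcases f3 with h | ⟨K, hK, he⟩
    · exact Or.inl h
    · obtain ⟨hne, hmem⟩ := hinv.1 K hK
      obtain ⟨c, hcK⟩ := List.exists_mem_of_ne_nil K hne
      exact Or.inr ⟨c, K, (hmem c hcK).1,
        pvBlock_class a s hs comps hinv K hK c hcK, he⟩

lemma pvFinal_eq (a : List (List (List Bool))) (s : Int) :
    largestchunk a s = largestchunk_alt a s := by
  rw [pvA_eq_model]
  by_cases hs : 1 ≤ s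
  · exact pvIsMax_unique a s _ _ (pvModel_isMax a s hs) (pvAlt_isMax a s hs)
  · have hr1 : PySem.List.pyRange 0 s 1 = [] := by
      rw [PySem.List.pyRange_one]
      have h0 : (s - 0).toNat = 0 := by omega
      rw [h0]
      rfl
    have hs3 : s ^ 3 ≤ 0 := by nlinarith [sq_nonneg s]
    have hr3 : PySem.List.pyRange 0 (s ^ 3) 1 = [] := by
      rw [PySem.List.pyRange_one]
      have h0 : (s ^ 3 - 0).toNat = 0 := by omega
      rw [h0]
      rfl
    unfold pvModel largestchunk_alt
    rw [hr1, hr3]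
    rfl

-- ===== VERDICT (by name: the statement is the Claim_ definition above) =====
theorem largestchunk_spec : Claim_equal_largestchunk := by
  intro array size _ _
  unfold Spec_largestchunk
  exact pvFinal_eq array size
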